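-- pv_equiv track=rewrite | github.com/ezcolin2/codetree-TILs | 240907/2차원 폭발 게임/The-2D-bomb-game.py | solution
-- ===== SOURCE A (Python) =====
-- def explode(arr, m):
--     n = len(arr)
--     new_arr = [row[:] for row in arr]
--     for col_idx in range(n):
--         start_idx, end_idx = 0, 0 # l, r
--         while True:
--             # 반복문 처음 시작한다는 것은 start_idx ~ end_idx까지 연속된다는 뜻
--             # 마지막이라면 종료
--             if end_idx == n-1:
--                 # 연속 횟수 체크해서 터뜨림
--                 if end_idx - start_idx + 1 >= m:
--                     for i in range(start_idx, end_idx+1):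
--                         new_arr[i][col_idx] = 0
--                 break
--             # 다른 게 나왔다면
--             if arr[start_idx][col_idx] != arr[end_idx+1][col_idx]:
--                 # 연속 횟수 체크해서 터뜨림
--                 if end_idx - start_idx + 1 >= m:
--                     for i in range(start_idx, end_idx+1):
--                         new_arr[i][col_idx] = 0
--                 start_idx = end_idx+1
--                 end_idx = end_idx+1
--                 continue
--             # 같은 게 나왔다면
--             end_idx += 1
--
--     return new_arr
--
-- def fall(arr):
--     n = len(arr)
--     new_arr = [[0]*n for _ in range(n)]
--     for col_idx in range(n):
--         # 0인 것을 제외하고 순서대로 쌓는다.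
--         new_row_idx = n-1
--         for row_idx in range(n-1, -1, -1):
--             # 0인 것은 패스
--             if arr[row_idx][col_idx] == 0:
--                 continue
--             # 0이 아니라면
--             new_arr[new_row_idx][col_idx] = arr[row_idx][col_idx]
--             new_row_idx -= 1
--     return new_arr
--
-- def rotate(arr):
--     n = len(arr)
--     new_arr = [[0]*n for _ in range(n)]
--     for row_idx in range(n):
--         for col_idx in range(n):
--             new_arr[col_idx][n-1-row_idx] = arr[row_idx][col_idx]
--     return new_arr
--
-- def is_bomb_remaining(arr, m):
--     n = len(arr)
--     new_arr = explode(arr, m)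
--     for i in range(n):
--         for j in range(n):
--             if arr[i][j]!=new_arr[i][j]:
--                 return True
--     return False
--
-- def solution(arr, m, k):
--     new_arr = [row[:] for row in arr]
--     n = len(arr)
--     for _ in range(k):
--         # 터뜨림
--         new_arr = explode(new_arr, m)
--         # 떨어뜨림
--         new_arr = fall(new_arr)
--             # 끝나고도 터질 폭탄이 남아있다면
--         while is_bomb_remaining(new_arr, m):
--         # 터뜨림
--             new_arr = explode(new_arr, m)
--         # 떨어뜨림
--             new_arr = fall(new_arr)
--         # 회전
--         new_arr = rotate(new_arr)
--
--         # 떨어뜨림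
--         new_arr = fall(new_arr)
--     while is_bomb_remaining(new_arr, m):
--         # 터뜨림
--         new_arr = explode(new_arr, m)
--         # 떨어뜨림
--         new_arr = fall(new_arr)
--     return new_arr
-- ===== SOURCE B (Python) =====
-- def solution(arr, m, k):
--     # Bomb game on implicit-gravity column stacks with per-column cascading
--     # and cycle detection over rounds (return value only).
--     n = len(arr)
--
--     def rle(vals):
--         runs = []
--         for v in vals:
--             if runs and runs[-1][0] == v:
--                 runs[-1] = (v, runs[-1][1] + 1)
--             else:
--                 runs.append((v, 1))
--         return runs
--
--     def stabilize(stack):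
--         # one fused explode+gravity pass, then cascade this column to its own fixpoint
--         stack = [v for v, c in rle(stack) if v != 0 and c < m for _ in range(c)]
--         while any(c >= m for _, c in rle(stack)):
--             stack = [v for v, c in rle(stack) if c < m for _ in range(c)]
--         return stack
--
--     def spill(stacks):
--         # clockwise rotation fused with gravity, computed directly on the stacks
--         return [[s[len(s) - 1 - j] for s in stacks if j < len(s)] for j in range(n)]
--
--     def bombed(stacks):
--         return any(v != 0 and c >= m for s in stacks for v, c in rle(s))
--
--     stacks = [[row[c] for row in arr] for c in range(n)]
--     t, rounds, seen = 0, max(k, 0), {}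
--     while t < rounds:
--         key = tuple(map(tuple, stacks))
--         if key in seen:
--             rounds = t + (rounds - t) % (t - seen[key])
--             break
--         seen[key] = t
--         stacks = spill([stabilize(s) for s in stacks])
--         t += 1
--     for _ in range(rounds - t):
--         stacks = spill([stabilize(s) for s in stacks])
--     if bombed(stacks):
--         stacks = [stabilize(s) for s in stacks]
--     return [[(stacks[c][r - (n - len(stacks[c]))] if r >= n - len(stacks[c]) else 0)
--              for c in range(n)] for r in range(n)]
-- ===== Notes on version B (the rewrite author's own statement) =====
-- stated objective: alternative
-- what changed: B abandons A's n x n grid simulation: it keeps the board as implicit-gravity column stacks (nonzero cells only), cascades each column independently to its own fixpoint via run-length encoding instead of A's global explode/fall/is-bomb-remaining board loop, fuses the rotation with gravity into a single gather over the stacks, and detects cycles in the round sequence so repeated board states let it skip ahead (k mod period) instead of simulating all k rounds.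
-- intended difference: On k <= 0 with some row longer than len(arr) and no vertical run of length >= m on the n x n board, A returns its raw copy of arr keeping the cells beyond the n x n board, while B returns exactly the n x n board (which is what A itself returns whenever any explosion or round occurs); the uniform board is the intended value. — e.g. on solution([[1, 2]], 2, 0): A returns [[1, 2]], B returns [[1]]
import Mathlib
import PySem

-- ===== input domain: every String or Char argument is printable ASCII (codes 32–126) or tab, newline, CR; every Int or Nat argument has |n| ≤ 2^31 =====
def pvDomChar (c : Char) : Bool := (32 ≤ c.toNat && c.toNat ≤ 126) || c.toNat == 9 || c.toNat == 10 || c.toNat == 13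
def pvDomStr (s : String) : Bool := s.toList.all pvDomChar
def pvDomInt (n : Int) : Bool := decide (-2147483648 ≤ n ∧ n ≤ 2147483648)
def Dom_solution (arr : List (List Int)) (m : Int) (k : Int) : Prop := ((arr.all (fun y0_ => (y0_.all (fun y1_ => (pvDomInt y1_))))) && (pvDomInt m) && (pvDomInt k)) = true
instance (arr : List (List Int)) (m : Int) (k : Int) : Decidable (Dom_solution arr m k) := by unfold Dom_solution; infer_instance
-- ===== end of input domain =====

-- B replaces A's grid simulation by implicit-gravity column sts cascaded per column to
-- their own fixpoints, a rotation fused with gravity, and cycle detection over the k rounds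
-- (return value only; A does not mutate its argument).

-- shared 2D read/write helpers (board cell access; Pre_ keeps every accessed index in range)
def get2 (g : List (List Int)) (i j : Nat) : Int := (g.getD i []).getD j 0
def set2 (g : List (List Int)) (i j : Nat) (v : Int) : List (List Int) :=
  g.modify i (fun row => row.set j v)
-- fuel bound for port A's while-loops (a totality guard, not part of the Python:
-- each iteration strictly decreases the number of nonzero cells on the board)
def nzCount (cols : List (List Int)) : Nat :=
  (cols.map (fun c => (c.filter (fun v => v != 0)).length)).sum
def boardColsOf (g : List (List Int)) (n : Nat) : List (List Int) :=
  (List.range n).map (fun c => (List.range n).map (fun r => get2 g r c))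

-- ===== PORT A =====
def zeroCol (c : Nat) (s e : Nat) (g : List (List Int)) : List (List Int) :=
  (List.range' s (e + 1 - s)).foldl (fun g i => set2 g i c 0) g

def explodeLoop (arr : List (List Int)) (m : Int) (c n : Nat) :
    Nat → Nat → List (List Int) → Nat → List (List Int)
  | _, _, g, 0 => g
  | s, e, g, fuel+1 =>
    if e = n - 1 then
      (if m ≤ (e : Int) - (s : Int) + 1 then zeroCol c s e g else g)
    else if get2 arr s c ≠ get2 arr (e+1) c then
      explodeLoop arr m c n (e+1) (e+1)
        (if m ≤ (e : Int) - (s : Int) + 1 then zeroCol c s e g else g) fuel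
    else
      explodeLoop arr m c n s (e+1) g fuel

def explode (arr : List (List Int)) (m : Int) : List (List Int) :=
  let n := arr.length
  (List.range n).foldl (fun g c => explodeLoop arr m c n 0 0 g n) (arr.map (fun row => row))

def fall (arr : List (List Int)) : List (List Int) :=
  let n := arr.length
  (List.range n).foldl (fun g c =>
      ((PySem.List.pyRange ((n : Int) - 1) (-1) (-1)).foldl
        (fun (st : List (List Int) × Int) r =>
          if get2 arr r.toNat c = 0 then st
          else (set2 st.1 st.2.toNat c (get2 arr r.toNat c), st.2 - 1))
        (g, (n : Int) - 1)).1)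
    (List.replicate n (List.replicate n 0))

def rotate (arr : List (List Int)) : List (List Int) :=
  let n := arr.length
  (List.range n).foldl (fun g r =>
      (List.range n).foldl (fun g c => set2 g c (n - 1 - r) (get2 arr r c)) g)
    (List.replicate n (List.replicate n 0))

def isBombRemaining (arr : List (List Int)) (m : Int) : Bool :=
  let n := arr.length
  let e := explode arr m
  (List.range n).any (fun i => (List.range n).any (fun j => get2 arr i j != get2 e i j))

def whileA (m : Int) : Nat → List (List Int) → List (List Int)
  | 0, g => g
  | fuel+1, g => if isBombRemaining g m then whileA m fuel (fall (explode g m)) else g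

def solution (arr : List (List Int)) (m : Int) (k : Int) : List (List Int) :=
  let g := (List.range k.toNat).foldl
    (fun g _ =>
      let g1 := fall (explode g m)
      let g2 := whileA m (nzCount (boardColsOf g1 g1.length) + 1) g1
      fall (rotate g2))
    (arr.map (fun row => row))
  whileA m (nzCount (boardColsOf g g.length) + 1) g

-- ===== PORT B =====
-- run-length encoding of a column (Source B's rle)
def rleB (vals : List Int) : List (Int × Int) :=
  vals.foldl (fun runs v =>
    match runs.getLast? with
    | some wc => if wc.1 = v then runs.dropLast ++ [(wc.1, wc.2 + 1)] else runs ++ [(v, 1)]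
    | none => [(v, 1)]) []

-- first pass of Source B's stabilize: drop zeros and runs of length >= m, keep the rest
def crushB (m : Int) (stack : List Int) : List Int :=
  (rleB stack).flatMap (fun vc =>
    if vc.1 ≠ 0 ∧ vc.2 < m then List.replicate vc.2.toNat vc.1 else [])

-- body of Source B's stabilize while-loop (stack already zero-free)
def crushLoopB (m : Int) (stack : List Int) : List Int :=
  (rleB stack).flatMap (fun vc =>
    if vc.2 < m then List.replicate vc.2.toNat vc.1 else [])

-- Source B's while loop; fuel is a totality guard (each firing iteration shortens the stack)
def stabLoopB (m : Int) : Nat → List Int → List Int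
  | 0, s => s
  | fuel+1, s =>
    if (rleB s).any (fun vc => decide (m ≤ vc.2)) then stabLoopB m fuel (crushLoopB m s)
    else s

def stabilizeB (m : Int) (stack : List Int) : List Int :=
  let s := crushB m stack
  stabLoopB m (s.length + 1) s

-- clockwise rotation fused with gravity, directly on the sts
def spillB (n : Nat) (sts : List (List Int)) : List (List Int) :=
  (List.range n).map (fun j =>
    (sts.filter (fun s => decide (j < s.length))).map (fun s => s.getD (s.length - 1 - j) 0))

def bombedB (m : Int) (sts : List (List Int)) : Bool :=
  sts.any (fun s => (rleB s).any (fun vc => vc.1 != 0 && decide (m ≤ vc.2)))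

-- Source B's cycle-detecting round loop: returns the state at the first repeat (or exhaustion)
-- together with the number of rounds still owed ((rounds - t) % period at the repeat)
def loopB (m : Int) (n : Nat) :
    Nat → Nat → PySem.Dict (List (List Int)) Nat → List (List Int) → List (List Int) × Nat
  | 0, _, _, s => (s, 0)
  | r+1, t, seen, s =>
    match seen.get? s with
    | some j => (s, (r+1) % (t - j))
    | none => loopB m n r (t+1) (seen.insert s t) (spillB n (s.map (stabilizeB m)))

def solution_alt (arr : List (List Int)) (m : Int) (k : Int) : List (List Int) :=
  let n := arr.length
  -- Python's row[c] (Pre_ keeps c in range for every row)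
  let stacks0 := (List.range n).map (fun c => arr.map (fun row => row.getD c 0))
  let p := loopB m n k.toNat 0 PySem.Dict.empty stacks0
  let s2 := (List.range p.2).foldl (fun s _ => spillB n (s.map (stabilizeB m))) p.1
  let s3 := if bombedB m s2 then s2.map (stabilizeB m) else s2
  (List.range n).map (fun r => (List.range n).map (fun c =>
    let s := s3.getD c []
    if n - s.length ≤ r then s.getD (r - (n - s.length)) 0 else 0))

-- ===== PRECONDITION & SPEC =====
-- Pre_ excludes only inputs on which A raises IndexError: some row shorter than len(arr).
def Pre_solution (arr : List (List Int)) (m : Int) (k : Int) : Prop :=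
  ∀ row ∈ arr, arr.length ≤ row.length

instance (arr : List (List Int)) (m : Int) (k : Int) : Decidable (Pre_solution arr m k) := by
  unfold Pre_solution; infer_instance

def pvWitness_solution : List (List Int) × Int × Int := ([[1, 1], [1, 2]], 2, 1)

-- On k ≤ 0 with an overlong row and no exploding run on the n×n board, A happens to return
-- its raw ragged copy of arr while B returns the n×n board; B's uniform board is the
-- intended value (it is what A itself returns whenever any explosion or round occurs).
def D_solution (arr : List (List Int)) (m : Int) (k : Int) : Prop :=
  k ≤ 0 ∧ (∃ row ∈ arr, arr.length < row.length) ∧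
    ¬ ∃ c < arr.length, ∃ j < arr.length, ∃ i < j + 1, get2 arr i c ≠ 0 ∧
        (∀ t < j + 1, i ≤ t → get2 arr t c = get2 arr i c) ∧ m ≤ (j : Int) - (i : Int) + 1

instance (arr : List (List Int)) (m : Int) (k : Int) : Decidable (D_solution arr m k) := by
  unfold D_solution; infer_instance

def Spec_solution (arr : List (List Int)) (m : Int) (k : Int) (out : List (List Int)) : Prop :=
  ¬ D_solution arr m k → out = solution_alt arr m k
instance (arr : List (List Int)) (m : Int) (k : Int) (out : List (List Int)) : Decidable (Spec_solution arr m k out) := by unfold Spec_solution; infer_instance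

def pvDiffWitness_solution : List (List Int) × Int × Int := ([[1, 2]], 2, 0)
def pvDiffWitnessOut_solution : (List (List Int)) × (List (List Int)) := ([[1, 2]], [[1]])

-- ===== CLAIM (what is proved, stated in full; the proofs are below) =====
def Claim_unchanged_solution : Prop := ∀ (arr : List (List Int)) (m : Int) (k : Int), Dom_solution arr m k → Pre_solution arr m k → Spec_solution arr m k (solution arr m k)
def Claim_changed_solution : Prop := Dom_solution (pvDiffWitness_solution.1) (pvDiffWitness_solution.2.1) (pvDiffWitness_solution.2.2) ∧ Pre_solution (pvDiffWitness_solution.1) (pvDiffWitness_solution.2.1) (pvDiffWitness_solution.2.2) ∧ D_solution (pvDiffWitness_solution.1) (pvDiffWitness_solution.2.1) (pvDiffWitness_solution.2.2) ∧ solution (pvDiffWitness_solution.1) (pvDiffWitness_solution.2.1) (pvDiffWitness_solution.2.2) = pvDiffWitnessOut_solution.1 ∧ solution_alt (pvDiffWitness_solution.1) (pvDiffWitness_solution.2.1) (pvDiffWitness_solution.2.2) = pvDiffWitnessOut_solution.2 ∧ pvDiffWitnessOut_solution.1 ≠ pvDiffWitnessOut_solution.2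
def Claim_exact_solution : Prop := ∀ (arr : List (List Int)) (m : Int) (k : Int), Dom_solution arr m k → Pre_solution arr m k → D_solution arr m k → solution arr m k ≠ solution_alt arr m k

-- ===== LEMMAS AND PROOFS =====

-- ---------- proof-side models ----------

def colOf (g : List (List Int)) (n c : Nat) : List Int :=
  (List.range n).map (fun r => get2 g r c)

def Ge2 (g : List (List Int)) (n : Nat) : Prop :=
  g.length = n ∧ ∀ r, r < n → n ≤ (g.getD r []).length

def Sq2 (g : List (List Int)) (n : Nat) : Prop :=
  g.length = n ∧ ∀ r, r < n → (g.getD r []).length = n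

def zero1 (a : List Int) (s e : Nat) : List Int :=
  (List.range' s (e + 1 - s)).foldl (fun a i => a.set i 0) a

def runsFrom (v : Int) (c : Nat) : List Int → List (Int × Nat)
  | [] => [(v, c)]
  | x :: xs => if x = v then runsFrom v (c+1) xs else (v, c) :: runsFrom x 1 xs

def blastR (m : Int) (rs : List (Int × Nat)) : List Int :=
  rs.flatMap (fun vc => List.replicate vc.2 (if m ≤ (vc.2 : Int) then 0 else vc.1))

def blastM (m : Int) (col : List Int) : List Int :=
  match col with
  | [] => []
  | x :: xs => blastR m (runsFrom x 1 xs)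

def colLoop (col : List Int) (m : Int) (n : Nat) : Nat → Nat → List Int → Nat → List Int
  | _, _, a, 0 => a
  | s, e, a, fuel+1 =>
    if e = n - 1 then
      (if m ≤ (e : Int) - (s : Int) + 1 then zero1 a s e else a)
    else if col.getD s 0 ≠ col.getD (e+1) 0 then
      colLoop col m n (e+1) (e+1) (if m ≤ (e : Int) - (s : Int) + 1 then zero1 a s e else a) fuel
    else
      colLoop col m n s (e+1) a fuel

-- a maximal nonzero vertical run of length ≥ m exists in this column
def runCondCol (col : List Int) (m : Int) : Prop :=
  ∃ j < col.length, ∃ i < j + 1, col.getD i 0 ≠ 0 ∧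
    (∀ t < j + 1, i ≤ t → col.getD t 0 = col.getD i 0) ∧ m ≤ (j : Int) - (i : Int) + 1

def settleB (n : Nat) (col : List Int) : List Int :=
  let kept := col.filter (fun v => v != 0)
  List.replicate (n - kept.length) 0 ++ kept

-- the column with its zeros dropped after one zero-aware explosion pass
def crush0 (m : Int) (col : List Int) : List Int :=
  (blastM m col).filter (fun v => v != 0)

-- a stack padded with the zeros above it
def padS (n : Nat) (s : List Int) : List Int :=
  List.replicate (n - s.length) 0 ++ s

def expandR (rs : List (Int × Nat)) : List Int :=
  rs.flatMap (fun vc => List.replicate vc.2 vc.1)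

-- ---------- cell-level lemmas ----------

theorem length_set2 (g : List (List Int)) (i j : Nat) (v : Int) :
    (set2 g i j v).length = g.length := by
  simp [set2]

theorem getD_set2 (g : List (List Int)) (i j : Nat) (v : Int) (r : Nat) :
    (set2 g i j v).getD r [] = if r = i then (g.getD r []).set j v else g.getD r [] := by
  simp only [set2, List.getD_eq_getElem?_getD, List.getElem?_modify]
  by_cases h : i = r
  · subst h; cases hg : g[i]? <;> simp [hg]
  · have h' : ¬ r = i := fun hh => h hh.symm
    cases hg : g[r]? <;> simp [h, h', hg]

theorem rowlen_set2 (g : List (List Int)) (i j : Nat) (v : Int) (r : Nat) :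
    ((set2 g i j v).getD r []).length = (g.getD r []).length := by
  rw [getD_set2]; split <;> simp

theorem getD_set (l : List Int) (i j : Nat) (v d : Int) :
    (l.set i v).getD j d = if j = i ∧ i < l.length then v else l.getD j d := by
  by_cases h : j = i
  · subst h
    by_cases hl : j < l.length
    · simp [List.getD_eq_getElem?_getD, List.getElem?_set_self hl, hl]
    · rw [List.getD_eq_getElem?_getD, List.getD_eq_getElem?_getD]
      rw [List.getElem?_eq_none (by simpa using hl), List.getElem?_eq_none (by omega)]
      simp [hl]
  · rw [List.getD_eq_getElem?_getD, List.getD_eq_getElem?_getD,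
        List.getElem?_set_ne (fun hh => h hh.symm)]
    simp [h]

theorem get2_set2 (g : List (List Int)) (i j : Nat) (v : Int) (r c : Nat) :
    get2 (set2 g i j v) r c
      = if r = i ∧ c = j ∧ j < (g.getD i []).length then v else get2 g r c := by
  unfold get2
  rw [getD_set2]
  by_cases hr : r = i
  · subst hr
    simp only [eq_self_iff_true, if_true, true_and]
    rw [getD_set]
  · simp [hr]

theorem get2_set2_ne (g : List (List Int)) (i j : Nat) (v : Int) (r c : Nat)
    (h : r ≠ i ∨ c ≠ j) : get2 (set2 g i j v) r c = get2 g r c := by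
  rw [get2_set2]
  rcases h with h | h <;> simp [h]

theorem length_colOf (g : List (List Int)) (n c : Nat) : (colOf g n c).length = n := by
  simp [colOf]

theorem getD_colOf (g : List (List Int)) (n c r : Nat) (hr : r < n) :
    (colOf g n c).getD r 0 = get2 g r c := by
  simp [colOf, PySem.List.getD_map_range, hr]

theorem colOf_congr_get2 (g h : List (List Int)) (n c : Nat)
    (hh : ∀ r, r < n → get2 g r c = get2 h r c) : colOf g n c = colOf h n c := by
  unfold colOf
  exact List.map_inj_left.mpr (fun r hr => hh r (List.mem_range.mp hr))

-- ---------- zero1 ----------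

theorem foldl_set_zero_spec : ∀ (len s : Nat) (a : List Int), s + len ≤ a.length →
    (List.range' s len).foldl (fun a i => a.set i 0) a
      = a.take s ++ List.replicate len 0 ++ a.drop (s + len) := by
  intro len
  induction len with
  | zero => intro s a h; simp
  | succ len ih =>
    intro s a h
    rw [List.range'_succ, List.foldl_cons, ih (s+1) (a.set s 0) (by simp; omega)]
    have hs : s < a.length := by omega
    have h1 : (a.set s 0).take (s+1) = a.take s ++ [0] := by
      rw [List.take_set]
      rw [List.take_succ]
      rw [List.getElem?_eq_getElem hs]
      have hlen : (a.take s).length = s := by simp; omega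
      rw [List.set_append_right _ _ (by omega)]
      simp [hlen]
    have h2 : (a.set s 0).drop (s+1+len) = a.drop (s+1+len) := by
      rw [List.drop_set]
      simp [show s < s+1+len by omega]
    rw [h1, h2]
    rw [show s+1+len = s+(len+1) by omega]
    simp [List.replicate_succ, List.append_assoc]

theorem zero1_eq (a : List Int) (s e : Nat) (hse : s ≤ e) (he : e < a.length) :
    zero1 a s e = a.take s ++ List.replicate (e + 1 - s) 0 ++ a.drop (e + 1) := by
  unfold zero1
  rw [foldl_set_zero_spec (e+1-s) s a (by omega)]
  congr 2
  omega

theorem foldl_set_length : ∀ (l : List Nat) (a : List Int),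
    (l.foldl (fun a i => a.set i 0) a).length = a.length := by
  intro l
  induction l with
  | nil => intro a; rfl
  | cons x xs ih => intro a; rw [List.foldl_cons, ih]; simp

theorem zero1_length (a : List Int) (s e : Nat) : (zero1 a s e).length = a.length := by
  unfold zero1; exact foldl_set_length _ a

theorem drop_append_left (C B : List Int) (q : Nat) (h : C.length = q) :
    (C ++ B).drop q = B := by
  subst h; simp

theorem take_append_left (C B : List Int) (q : Nat) (h : C.length = q) :
    (C ++ B).take q = C := by
  subst h; simp

theorem zero1_drop (a : List Int) (s e : Nat) (hse : s ≤ e) (he : e < a.length) :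
    (zero1 a s e).drop (e + 1) = a.drop (e + 1) := by
  rw [zero1_eq a s e hse he]
  exact drop_append_left _ _ _
    (by rw [List.length_append, List.length_take, List.length_replicate]; omega)

theorem zero1_take (a : List Int) (s e : Nat) (hse : s ≤ e) (he : e < a.length) :
    (zero1 a s e).take (e + 1) = a.take s ++ List.replicate (e + 1 - s) 0 := by
  rw [zero1_eq a s e hse he]
  exact take_append_left _ _ _
    (by rw [List.length_append, List.length_take, List.length_replicate]; omega)

-- ---------- the 1-D explode loop vs run groups ----------

theorem drop_all_eq_replicate (col : List Int) (s e : Nat) (v : Int)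
    (hv : col.getD s 0 = v) (hse : s ≤ e) (hlen : col.length = e + 1)
    (hrun : ∀ t, s ≤ t → t ≤ e → col.getD t 0 = col.getD s 0) :
    col.drop s = List.replicate (e + 1 - s) v := by
  rw [List.eq_replicate_iff]
  constructor
  · simp [hlen]
  · intro b hb
    rw [List.mem_iff_getElem] at hb
    obtain ⟨idx, hidx, hbe⟩ := hb
    have hidx' : idx < col.length - s := by simpa using hidx
    rw [List.getElem_drop] at hbe
    have h1 : col.getD (s + idx) 0 = b := by
      rw [List.getD_eq_getElem?_getD, List.getElem?_eq_getElem (by omega)]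
      simpa using hbe
    have := hrun (s + idx) (by omega) (by omega)
    rw [h1, hv] at this
    exact this

theorem take_run_eq_replicate (col : List Int) (s e : Nat) (v : Int)
    (hv : col.getD s 0 = v) (hse : s ≤ e) (hlen : e < col.length)
    (hrun : ∀ t, s ≤ t → t ≤ e → col.getD t 0 = col.getD s 0) :
    (col.drop s).take (e + 1 - s) = List.replicate (e + 1 - s) v := by
  rw [List.eq_replicate_iff]
  constructor
  · simp; omega
  · intro b hb
    rw [List.mem_iff_getElem] at hb
    obtain ⟨idx, hidx, hbe⟩ := hb
    have hidx2 : idx < e + 1 - s := by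
      have := List.length_take_le (e+1-s) (col.drop s)
      omega
    rw [List.getElem_take, List.getElem_drop] at hbe
    have h1 : col.getD (s + idx) 0 = b := by
      rw [List.getD_eq_getElem?_getD, List.getElem?_eq_getElem (by omega)]
      simpa using hbe
    have := hrun (s + idx) (by omega) (by omega)
    rw [h1, hv] at this
    exact this

theorem drop_mono_eq (a col : List Int) (s t : Nat) (hst : s ≤ t)
    (h : a.drop s = col.drop s) : a.drop t = col.drop t := by
  have h0 := congrArg (List.drop (t - s)) h
  rw [List.drop_drop, List.drop_drop] at h0
  first
  | rwa [show t - s + s = t by omega] at h0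
  | rwa [show s + (t - s) = t by omega] at h0

theorem colLoop_eq (col : List Int) (m : Int) (n : Nat) :
    ∀ fuel s e a, col.length = n → a.length = n → s ≤ e → e < n → n - e ≤ fuel →
    (∀ t, s ≤ t → t ≤ e → col.getD t 0 = col.getD s 0) →
    a.drop s = col.drop s →
    colLoop col m n s e a fuel
      = a.take s ++ blastR m (runsFrom (col.getD s 0) (e - s + 1) (col.drop (e+1))) := by
  intro fuel
  induction fuel with
  | zero => intro s e a _ _ _ he hf _ _; omega
  | succ fuel ih =>
    intro s e a hcol halen hse he hf hrun hdrop
    rw [colLoop]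
    by_cases hend : e = n - 1
    · have hdropnil : col.drop (e+1) = [] := by
        apply List.drop_eq_nil_of_le; omega
      rw [hdropnil]
      have hrepl : col.drop s = List.replicate (e + 1 - s) (col.getD s 0) := by
        exact drop_all_eq_replicate col s e _ rfl hse (by omega) hrun
      rw [if_pos hend]
      have hcast : ((e : Int) - (s : Int) + 1) = ((e - s + 1 : Nat) : Int) := by
        push_cast; omega
      by_cases hm : m ≤ (e : Int) - (s : Int) + 1
      · rw [if_pos hm]
        have hm' : m ≤ ((e - s + 1 : Nat) : Int) := by rw [← hcast]; exact hm
        simp only [runsFrom, blastR, List.flatMap_cons, List.flatMap_nil, List.append_nil]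
        rw [if_pos hm']
        rw [zero1_eq a s e hse (by omega)]
        have hnil : a.drop (e+1) = [] := by
          rw [drop_mono_eq a col (e+1) (e+1) (le_refl _)
            (drop_mono_eq a col s (e+1) (by omega) hdrop), hdropnil]
        rw [hnil]
        simp [show e + 1 - s = e - s + 1 by omega]
      · rw [if_neg hm]
        have hm' : ¬ m ≤ ((e - s + 1 : Nat) : Int) := by rw [← hcast]; exact hm
        simp only [runsFrom, blastR, List.flatMap_cons, List.flatMap_nil, List.append_nil]
        rw [if_neg hm']
        conv_lhs => rw [← List.take_append_drop s a]
        rw [hdrop, hrepl, show e + 1 - s = e - s + 1 by omega]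
    · have he1 : e + 1 < n := by omega
      have hdropcons : col.drop (e+1) = col.getD (e+1) 0 :: col.drop (e+2) := by
        rw [List.drop_eq_getElem_cons (by omega)]
        congr 1
        rw [List.getD_eq_getElem?_getD, List.getElem?_eq_getElem (by omega)]
        rfl
      rw [if_neg hend]
      by_cases hne : col.getD s 0 ≠ col.getD (e+1) 0
      · rw [if_pos hne]
        set a' := if m ≤ (e : Int) - (s : Int) + 1 then zero1 a s e else a with ha'
        have ha'len : a'.length = n := by
          rw [ha']; split <;> simp [zero1_length, halen]
        have ha'drop : a'.drop (e+1) = col.drop (e+1) := by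
          have hadrop : a.drop (e+1) = col.drop (e+1) :=
            drop_mono_eq a col s (e+1) (by omega) hdrop
          rw [ha']; split
          · rw [zero1_drop a s e hse (by omega)]; exact hadrop
          · exact hadrop
        have := ih (e+1) (e+1) a' hcol ha'len (le_refl _) he1 (by omega)
          (by intro t h1 h2; have : t = e+1 := by omega
              rw [this]) ha'drop
        rw [this]
        rw [hdropcons]
        rw [runsFrom]
        rw [if_neg (by intro hh; exact hne hh.symm)]
        simp only [blastR, List.flatMap_cons]
        rw [show e + 1 - (e + 1) + 1 = 1 by omega]
        have hcast : ((e : Int) - (s : Int) + 1) = ((e - s + 1 : Nat) : Int) := by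
          push_cast; omega
        have htake : a'.take (e+1)
            = a.take s ++ List.replicate (e - s + 1) (if m ≤ ((e - s + 1 : Nat) : Int) then 0 else col.getD s 0) := by
          by_cases hm : m ≤ (e : Int) - (s : Int) + 1
          · have hm' : m ≤ ((e - s + 1 : Nat) : Int) := by rw [← hcast]; exact hm
            rw [ha', if_pos hm, if_pos hm']
            rw [zero1_take a s e hse (by omega), show e + 1 - s = e - s + 1 by omega]
          · have hm' : ¬ m ≤ ((e - s + 1 : Nat) : Int) := by rw [← hcast]; exact hm
            rw [ha', if_neg hm, if_neg hm']
            have : a.take (e+1) = a.take s ++ (a.drop s).take (e+1-s) := by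
              rw [← List.take_add]
              congr 1
              omega
            rw [this, hdrop]
            congr 1
            rw [show e - s + 1 = e + 1 - s by omega]
            exact take_run_eq_replicate col s e _ rfl hse (by omega) hrun
        rw [htake]
        simp [List.append_assoc]
      · rw [if_neg hne]
        push_neg at hne
        have := ih s (e+1) a hcol halen (by omega) he1 (by omega)
          (by intro t h1 h2
              by_cases ht : t ≤ e
              · exact hrun t h1 ht
              · have : t = e + 1 := by omega
                rw [this, ← hne]) hdrop
        rw [this, hdropcons]
        have hstep : runsFrom (col.getD s 0) (e - s + 1) (col.getD (e+1) 0 :: col.drop (e+2))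
            = runsFrom (col.getD s 0) (e + 1 - s + 1) (col.drop (e+2)) := by
          have hx : (col.getD (e+1) 0 = col.getD s 0) := hne.symm
          simp only [runsFrom, if_pos hx]
          congr 1
          omega
        rw [hstep]

theorem colLoop_blast (col : List Int) (m : Int) (n : Nat)
    (hcol : col.length = n) (hn : 0 < n) :
    colLoop col m n 0 0 col n = blastM m col := by
  cases col with
  | nil => simp at hcol; omega
  | cons x xs =>
    rw [colLoop_eq (x::xs) m n n 0 0 (x::xs) hcol hcol (le_refl 0) hn (by omega)
      (by intro t h1 h2; have : t = 0 := by omega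
          rw [this]) rfl]
    simp [blastM]

-- ---------- 2-D explode vs per-column loop ----------

theorem eq_of_getD (A B : List Int) (n : Nat) (hA : A.length = n) (hB : B.length = n)
    (h : ∀ r, r < n → A.getD r 0 = B.getD r 0) : A = B := by
  apply List.ext_getElem (by omega)
  intro i h1 h2
  have := h i (by omega)
  rwa [List.getD_eq_getElem?_getD, List.getD_eq_getElem?_getD,
    List.getElem?_eq_getElem h1, List.getElem?_eq_getElem h2] at this

theorem colOf_set2 (g : List (List Int)) (n c i : Nat) (v : Int)
    (hglen : g.length = n) (hrow : ∀ r, r < n → c < ((g.getD r []).length)) :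
    colOf (set2 g i c v) n c = (colOf g n c).set i v := by
  apply eq_of_getD _ _ n (length_colOf _ _ _) (by rw [List.length_set, length_colOf])
  intro r hr
  rw [getD_colOf _ _ _ _ hr, getD_set, get2_set2, length_colOf]
  by_cases hri : r = i
  · subst hri
    rw [if_pos ⟨rfl, rfl, hrow r hr⟩, if_pos ⟨rfl, hr⟩]
  · rw [if_neg (fun h => hri h.1), if_neg (fun h => hri h.1), getD_colOf _ _ _ _ hr]

theorem colOf_set2_other (g : List (List Int)) (n c c' i : Nat) (v : Int) (hcc : c' ≠ c) :
    colOf (set2 g i c v) n c' = colOf g n c' := by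
  apply colOf_congr_get2
  intro r hr
  exact get2_set2_ne _ _ _ _ _ _ (Or.inr hcc)

theorem foldl_set2_len (c : Nat) : ∀ (l : List Nat) (g : List (List Int)),
    ((l.foldl (fun g i => set2 g i c 0) g).length = g.length)
      ∧ (∀ r, ((l.foldl (fun g i => set2 g i c 0) g).getD r []).length = (g.getD r []).length) := by
  intro l
  induction l with
  | nil => intro g; exact ⟨rfl, fun r => rfl⟩
  | cons x xs ih =>
    intro g
    rw [List.foldl_cons]
    refine ⟨?_, fun r => ?_⟩
    · rw [(ih _).1, length_set2]
    · rw [(ih _).2, rowlen_set2]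

theorem foldl_set2_other (c : Nat) : ∀ (l : List Nat) (g : List (List Int)) (n c' : Nat), c' ≠ c →
    colOf (l.foldl (fun g i => set2 g i c 0) g) n c' = colOf g n c' := by
  intro l
  induction l with
  | nil => intros; rfl
  | cons x xs ih =>
    intro g n c' hc
    rw [List.foldl_cons, ih _ n c' hc, colOf_set2_other _ _ _ _ _ _ hc]

theorem foldl_set2_colOf (n c : Nat) : ∀ (l : List Nat) (g : List (List Int)),
    g.length = n → (∀ r, r < n → c < (g.getD r []).length) →
    colOf (l.foldl (fun g i => set2 g i c 0) g) n c
      = l.foldl (fun a i => a.set i 0) (colOf g n c) := by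
  intro l
  induction l with
  | nil => intros; rfl
  | cons x xs ih =>
    intro g hg hrow
    rw [List.foldl_cons, List.foldl_cons, ← colOf_set2 g n c x 0 hg hrow]
    exact ih _ (by rw [length_set2]; exact hg)
      (fun r hr => by rw [rowlen_set2]; exact hrow r hr)

theorem zeroCol_facts (c s e : Nat) (g : List (List Int)) :
    (zeroCol c s e g).length = g.length
      ∧ (∀ r, ((zeroCol c s e g).getD r []).length = (g.getD r []).length)
      ∧ (∀ n c', c' ≠ c → colOf (zeroCol c s e g) n c' = colOf g n c') := by
  exact ⟨(foldl_set2_len c _ g).1, (foldl_set2_len c _ g).2,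
    fun n c' hc => foldl_set2_other c _ g n c' hc⟩

theorem zeroCol_colOf (n c s e : Nat) (g : List (List Int))
    (hg : g.length = n) (hrow : ∀ r, r < n → c < (g.getD r []).length) :
    colOf (zeroCol c s e g) n c = zero1 (colOf g n c) s e := by
  unfold zeroCol zero1
  exact foldl_set2_colOf n c _ g hg hrow

theorem explodeLoop_struct (arr : List (List Int)) (m : Int) (c n : Nat) :
    ∀ fuel s e g, ((explodeLoop arr m c n s e g fuel).length = g.length)
      ∧ (∀ r, ((explodeLoop arr m c n s e g fuel).getD r []).length = (g.getD r []).length)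
      ∧ (∀ n' c', c' ≠ c → colOf (explodeLoop arr m c n s e g fuel) n' c' = colOf g n' c') := by
  intro fuel
  induction fuel with
  | zero => intro s e g; exact ⟨rfl, fun r => rfl, fun n' c' _ => rfl⟩
  | succ fuel ih =>
    intro s e g
    by_cases hend : e = n - 1
    · simp only [explodeLoop, if_pos hend]
      split
      · exact ⟨(zeroCol_facts c s e g).1, (zeroCol_facts c s e g).2.1,
          fun n' c' hc => (zeroCol_facts c s e g).2.2 n' c' hc⟩
      · exact ⟨rfl, fun r => rfl, fun n' c' _ => rfl⟩
    · simp only [explodeLoop, if_neg hend]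
      split
      · split
        · refine ⟨?_, fun r => ?_, fun n' c' hc => ?_⟩
          · rw [(ih _ _ _).1, (zeroCol_facts c s e g).1]
          · rw [(ih _ _ _).2.1, (zeroCol_facts c s e g).2.1]
          · rw [(ih _ _ _).2.2 _ _ hc, (zeroCol_facts c s e g).2.2 _ _ hc]
        · exact ih _ _ _
      · exact ih _ _ _

theorem explodeLoop_colOf (arr : List (List Int)) (m : Int) (c n : Nat) :
    ∀ fuel s e g, g.length = n → (∀ r, r < n → c < (g.getD r []).length) →
    s ≤ e → e < n →
    colOf (explodeLoop arr m c n s e g fuel) n c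
      = colLoop (colOf arr n c) m n s e (colOf g n c) fuel := by
  intro fuel
  induction fuel with
  | zero => intros; rfl
  | succ fuel ih =>
    intro s e g hg hrow hse he
    simp only [explodeLoop, colLoop]
    rw [getD_colOf arr n c s (by omega)]
    by_cases hend : e = n - 1
    · rw [if_pos hend, if_pos hend]
      split
      · exact zeroCol_colOf n c s e g hg hrow
      · rfl
    · rw [if_neg hend, if_neg hend]
      have he1 : e + 1 < n := by omega
      rw [getD_colOf arr n c (e+1) he1]
      by_cases hne : get2 arr s c ≠ get2 arr (e+1) c
      · rw [if_pos hne, if_pos hne]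
        split
        · rw [ih _ _ _ ((zeroCol_facts c s e g).1.trans hg)
            (fun r hr => by rw [(zeroCol_facts c s e g).2.1]; exact hrow r hr)
            (le_refl _) he1, zeroCol_colOf n c s e g hg hrow]
        · exact ih _ _ _ hg hrow (le_refl _) he1
      · rw [if_neg hne, if_neg hne]
        exact ih _ _ _ hg hrow (by omega) he1

theorem explode_fold (arr : List (List Int)) (m : Int) (n : Nat) :
    ∀ (l : List Nat), (∀ i ∈ l, i < n) → l.Nodup →
    ∀ (g0 : List (List Int)), g0.length = n →
    (∀ r, r < n → n ≤ (g0.getD r []).length) →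
    (∀ c ∈ l, colOf g0 n c = colOf arr n c) →
    (∀ c ∈ l, colOf (l.foldl (fun g c => explodeLoop arr m c n 0 0 g n) g0) n c
        = colLoop (colOf arr n c) m n 0 0 (colOf arr n c) n)
    ∧ (∀ c', c' ∉ l → colOf (l.foldl (fun g c => explodeLoop arr m c n 0 0 g n) g0) n c'
        = colOf g0 n c')
    ∧ (l.foldl (fun g c => explodeLoop arr m c n 0 0 g n) g0).length = n
    ∧ (∀ r, r < n →
        n ≤ ((l.foldl (fun g c => explodeLoop arr m c n 0 0 g n) g0).getD r []).length) := by
  intro l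
  induction l with
  | nil => intro _ _ g0 h1 h2 _; exact ⟨fun c hc => absurd hc (List.not_mem_nil),
      fun c' _ => rfl, h1, h2⟩
  | cons x xs ih =>
    intro hlt hnd g0 hlen hrow hcols
    have hx : x < n := hlt x List.mem_cons_self
    have hn : 0 < n := by omega
    set g1 := explodeLoop arr m x n 0 0 g0 n with hg1
    have hst := explodeLoop_struct arr m x n n 0 0 g0
    have hg1len : g1.length = n := by rw [hg1, hst.1, hlen]
    have hg1row : ∀ r, r < n → n ≤ (g1.getD r []).length := by
      intro r hr; rw [hg1, hst.2.1]; exact hrow r hr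
    have hg1x : colOf g1 n x = colLoop (colOf arr n x) m n 0 0 (colOf arr n x) n := by
      rw [hg1, explodeLoop_colOf arr m x n n 0 0 g0 hlen
        (fun r hr => by have := hrow r hr; omega) (le_refl 0) hn,
        hcols x List.mem_cons_self]
    have hg1other : ∀ c', c' ≠ x → colOf g1 n c' = colOf g0 n c' := by
      intro c' hc'; rw [hg1]; exact hst.2.2 n c' hc'
    have hxnot : x ∉ xs := (List.nodup_cons.mp hnd).1
    have ihh := ih (fun i hi => hlt i (List.mem_cons_of_mem _ hi)) (List.nodup_cons.mp hnd).2
      g1 hg1len hg1row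
      (fun c hc => by
        rw [hg1other c (fun hcx => hxnot (hcx ▸ hc))]
        exact hcols c (List.mem_cons_of_mem _ hc))
    rw [List.foldl_cons]
    refine ⟨?_, ?_, ihh.2.2.1, ihh.2.2.2⟩
    · intro c hc
      rcases List.mem_cons.mp hc with hcx | hcxs
      · subst hcx
        rw [ihh.2.1 c hxnot, hg1x]
      · exact ihh.1 c hcxs
    · intro c' hc'
      rw [ihh.2.1 c' (fun h => hc' (List.mem_cons_of_mem _ h)),
        hg1other c' (fun h => hc' (h ▸ List.mem_cons_self))]

theorem map_id_rows (g : List (List Int)) : g.map (fun row => row) = g := by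
  simp

theorem explode_colOf (g : List (List Int)) (m : Int) (n : Nat)
    (hGe : Ge2 g n) (c : Nat) (hc : c < n) :
    colOf (explode g m) n c = blastM m (colOf g n c) := by
  rcases hGe with ⟨hlen, hrow⟩
  have h := explode_fold g m n (List.range n) (fun i hi => List.mem_range.mp hi)
    (List.nodup_range) (g.map (fun row => row)) (by rw [map_id_rows]; exact hlen)
    (by rw [map_id_rows]; exact hrow) (by rw [map_id_rows]; exact fun _ _ => rfl)
  have h2 := h.1 c (List.mem_range.mpr hc)
  rw [colLoop_blast _ _ _ (length_colOf _ _ _) (by omega)] at h2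
  show colOf ((List.range g.length).foldl (fun g_ c_ => explodeLoop g m c_ g.length 0 0 g_ g.length)
      (g.map (fun row => row))) n c = _
  rw [hlen]
  exact h2

theorem explode_struct (g : List (List Int)) (m : Int) (n : Nat) (hGe : Ge2 g n) :
    Ge2 (explode g m) n := by
  rcases hGe with ⟨hlen, hrow⟩
  have h := explode_fold g m n (List.range n) (fun i hi => List.mem_range.mp hi)
    (List.nodup_range) (g.map (fun row => row)) (by rw [map_id_rows]; exact hlen)
    (by rw [map_id_rows]; exact hrow) (by rw [map_id_rows]; exact fun _ _ => rfl)
  constructor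
  · show ((List.range g.length).foldl (fun g_ c_ => explodeLoop g m c_ g.length 0 0 g_ g.length)
      (g.map (fun row => row))).length = n
    rw [hlen]; exact h.2.2.1
  · intro r hr
    show n ≤ (((List.range g.length).foldl (fun g_ c_ => explodeLoop g m c_ g.length 0 0 g_ g.length)
      (g.map (fun row => row))).getD r []).length
    rw [hlen]; exact h.2.2.2 r hr

-- ---------- fall ----------

theorem pyRange_desc (n : Nat) :
    PySem.List.pyRange ((n : Int) - 1) (-1) (-1)
      = (List.range n).map (fun (k_ : Nat) => (n : Int) - 1 - (k_ : Int)) := by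
  have h1 : (((n : Int) - 1) - (-1)).toNat = n := by omega
  rw [PySem.List.pyRange_neg_one, h1]

theorem filter_length_le (col : List Int) (p : Int → Bool) :
    (col.filter p).length ≤ col.length := List.length_filter_le _ _

theorem replicate_set_last : ∀ (q : Nat) (x : Int),
    (List.replicate (q+1) (0:Int)).set q x = List.replicate q 0 ++ [x] := by
  intro q
  induction q with
  | zero => intro x; rfl
  | succ q ih =>
    intro x
    rw [List.replicate_succ, List.set_cons_succ, ih, List.replicate_succ]
    rfl

theorem fall_inner (arr : List (List Int)) (n c : Nat) (hc : c < n) :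
    ∀ (K : Nat), K ≤ n → ∀ (g0 : List (List Int)), g0.length = n →
    (∀ r, r < n → ((g0.getD r []).length = n)) →
    colOf g0 n c = List.replicate n 0 →
    (colOf (((List.range K).map (fun (k_ : Nat) => (n : Int) - 1 - (k_ : Int))).foldl
        (fun (st : List (List Int) × Int) r =>
          if get2 arr r.toNat c = 0 then st
          else (set2 st.1 st.2.toNat c (get2 arr r.toNat c), st.2 - 1))
        (g0, (n : Int) - 1)).1 n c
        = List.replicate (n - (((colOf arr n c).drop (n - K)).filter (fun v => v != 0)).length) 0
            ++ ((colOf arr n c).drop (n - K)).filter (fun v => v != 0))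
    ∧ (((List.range K).map (fun (k_ : Nat) => (n : Int) - 1 - (k_ : Int))).foldl
        (fun (st : List (List Int) × Int) r =>
          if get2 arr r.toNat c = 0 then st
          else (set2 st.1 st.2.toNat c (get2 arr r.toNat c), st.2 - 1))
        (g0, (n : Int) - 1)).2
        = (n : Int) - 1 - ((((colOf arr n c).drop (n - K)).filter (fun v => v != 0)).length : Int)
    ∧ (((List.range K).map (fun (k_ : Nat) => (n : Int) - 1 - (k_ : Int))).foldl
        (fun (st : List (List Int) × Int) r =>
          if get2 arr r.toNat c = 0 then st
          else (set2 st.1 st.2.toNat c (get2 arr r.toNat c), st.2 - 1))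
        (g0, (n : Int) - 1)).1.length = n
    ∧ (∀ r, r < n → ((((List.range K).map (fun (k_ : Nat) => (n : Int) - 1 - (k_ : Int))).foldl
        (fun (st : List (List Int) × Int) r =>
          if get2 arr r.toNat c = 0 then st
          else (set2 st.1 st.2.toNat c (get2 arr r.toNat c), st.2 - 1))
        (g0, (n : Int) - 1)).1.getD r []).length = n)
    ∧ (∀ c', c' ≠ c → colOf (((List.range K).map (fun (k_ : Nat) => (n : Int) - 1 - (k_ : Int))).foldl
        (fun (st : List (List Int) × Int) r =>
          if get2 arr r.toNat c = 0 then st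
          else (set2 st.1 st.2.toNat c (get2 arr r.toNat c), st.2 - 1))
        (g0, (n : Int) - 1)).1 n c' = colOf g0 n c') := by
  intro K
  induction K with
  | zero =>
    intro _ g0 hlen hrow hcol
    refine ⟨?_, ?_, hlen, hrow, fun c' _ => rfl⟩
    · simp only [List.range_zero, List.map_nil, List.foldl_nil]
      rw [List.drop_eq_nil_of_le (by rw [length_colOf]; omega)]
      simpa using hcol
    · simp only [List.range_zero, List.map_nil, List.foldl_nil]
      rw [List.drop_eq_nil_of_le (by rw [length_colOf]; omega)]
      simp
  | succ K ih =>
    intro hK g0 hlen hrow hcol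
    have hKn : K ≤ n := by omega
    obtain ⟨ih1, ih2, ih3, ih4, ih5⟩ := ih hKn g0 hlen hrow hcol
    rw [List.range_succ, List.map_append, List.foldl_append]
    set stK := (((List.range K).map (fun (k_ : Nat) => (n : Int) - 1 - (k_ : Int))).foldl
        (fun (st : List (List Int) × Int) r =>
          if get2 arr r.toNat c = 0 then st
          else (set2 st.1 st.2.toNat c (get2 arr r.toNat c), st.2 - 1))
        (g0, (n : Int) - 1)) with hstK
    simp only [List.map_cons, List.map_nil, List.foldl_cons, List.foldl_nil]
    have htoNat : ((n : Int) - 1 - ((K : Nat) : Int)).toNat = n - 1 - K := by omega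
    have hidx : n - 1 - K < n := by omega
    set col := colOf arr n c with hcoldef
    have hcollen : col.length = n := length_colOf _ _ _
    have hdropcons : col.drop (n - (K+1)) = col.getD (n - 1 - K) 0 :: col.drop (n - K) := by
      have h0 : col.drop (n - 1 - K) = col[n - 1 - K]'(by omega) :: col.drop (n - 1 - K + 1) :=
        List.drop_eq_getElem_cons (by omega)
      rw [show n - (K+1) = n - 1 - K by omega, h0, show n - 1 - K + 1 = n - K by omega]
      congr 1
      rw [List.getD_eq_getElem?_getD, List.getElem?_eq_getElem (by omega)]
      rfl
    have hget : get2 arr (n - 1 - K) c = col.getD (n - 1 - K) 0 :=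
      (getD_colOf arr n c _ hidx).symm
    set kept := ((col.drop (n - K)).filter (fun v => v != 0)) with hkept
    have hkeptlen : kept.length ≤ K := by
      rw [hkept]
      have h2 : (col.drop (n - K)).length = K := by
        rw [List.length_drop, hcollen]; omega
      calc ((col.drop (n - K)).filter (fun v => v != 0)).length
          ≤ (col.drop (n - K)).length := filter_length_le _ _
        _ = K := h2
    by_cases hz : get2 arr ((((n : Int) - 1 - ((K : Nat) : Int))).toNat) c = 0
    · rw [if_pos hz]
      rw [htoNat] at hz
      have hfilter : (col.drop (n - (K+1))).filter (fun v => v != 0) = kept := by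
        rw [hdropcons, List.filter_cons]
        rw [← hget, hz]
        simpa using hkept.symm
      rw [hfilter]
      exact ⟨ih1, ih2, ih3, ih4, ih5⟩
    · rw [if_neg hz]
      rw [htoNat] at hz
      have hfilter : (col.drop (n - (K+1))).filter (fun v => v != 0)
          = get2 arr (n - 1 - K) c :: kept := by
        rw [hdropcons, List.filter_cons, ← hget]
        simpa [hz] using hkept.symm
      have hwidx : stK.2.toNat = n - 1 - kept.length := by
        rw [ih2]; omega
      have hvalid : c < ((stK.1.getD (n - 1 - kept.length) []).length) := by
        rw [ih4 _ (by omega)]; omega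
      refine ⟨?_, ?_, ?_, ?_, ?_⟩
      · rw [hfilter]
        rw [colOf_set2 stK.1 n c _ _ ih3 (fun r hr => by rw [ih4 r hr]; omega)]
        rw [hwidx, ih1, htoNat]
        rw [List.set_append_left _ _ (by simp; omega)]
        rw [show (n : Nat) - kept.length = (n - kept.length - 1) + 1 by omega]
        rw [show n - 1 - kept.length = n - kept.length - 1 by omega]
        rw [replicate_set_last (n - kept.length - 1) _]
        simp only [List.length_cons, List.append_assoc, List.cons_append, List.nil_append]
        rw [show n - (kept.length + 1) = n - kept.length - 1 by omega]
      · rw [ih2, hfilter]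
        simp only [List.length_cons]
        push_cast
        ring
      · rw [length_set2]; exact ih3
      · intro r hr; rw [rowlen_set2]; exact ih4 r hr
      · intro c' hc'
        rw [colOf_set2_other _ _ _ _ _ _ hc']
        exact ih5 c' hc'

-- ---------- fall: outer fold over columns ----------

theorem fall_fold (arr : List (List Int)) (n : Nat) :
    ∀ (l : List Nat), (∀ i ∈ l, i < n) → l.Nodup →
    ∀ (g0 : List (List Int)), g0.length = n →
    (∀ r, r < n → (g0.getD r []).length = n) →
    (∀ c ∈ l, colOf g0 n c = List.replicate n 0) →
    (∀ c ∈ l, colOf (l.foldl (fun g c =>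
        (((List.range n).map (fun (k_ : Nat) => (n : Int) - 1 - (k_ : Int))).foldl
          (fun (st : List (List Int) × Int) r =>
            if get2 arr r.toNat c = 0 then st
            else (set2 st.1 st.2.toNat c (get2 arr r.toNat c), st.2 - 1))
          (g, (n : Int) - 1)).1) g0) n c = settleB n (colOf arr n c))
    ∧ (∀ c', c' ∉ l → colOf (l.foldl (fun g c =>
        (((List.range n).map (fun (k_ : Nat) => (n : Int) - 1 - (k_ : Int))).foldl
          (fun (st : List (List Int) × Int) r =>
            if get2 arr r.toNat c = 0 then st
            else (set2 st.1 st.2.toNat c (get2 arr r.toNat c), st.2 - 1))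
          (g, (n : Int) - 1)).1) g0) n c' = colOf g0 n c')
    ∧ (l.foldl (fun g c =>
        (((List.range n).map (fun (k_ : Nat) => (n : Int) - 1 - (k_ : Int))).foldl
          (fun (st : List (List Int) × Int) r =>
            if get2 arr r.toNat c = 0 then st
            else (set2 st.1 st.2.toNat c (get2 arr r.toNat c), st.2 - 1))
          (g, (n : Int) - 1)).1) g0).length = n
    ∧ (∀ r, r < n → ((l.foldl (fun g c =>
        (((List.range n).map (fun (k_ : Nat) => (n : Int) - 1 - (k_ : Int))).foldl
          (fun (st : List (List Int) × Int) r =>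
            if get2 arr r.toNat c = 0 then st
            else (set2 st.1 st.2.toNat c (get2 arr r.toNat c), st.2 - 1))
          (g, (n : Int) - 1)).1) g0).getD r []).length = n) := by
  intro l
  induction l with
  | nil => intro _ _ g0 h1 h2 _
           exact ⟨fun c hc => absurd hc (List.not_mem_nil), fun c' _ => rfl, h1, h2⟩
  | cons x xs ih =>
    intro hlt hnd g0 hlen hrow hcols
    have hx : x < n := hlt x List.mem_cons_self
    have hinner := fall_inner arr n x hx n (le_refl n) g0 hlen hrow
      (hcols x List.mem_cons_self)
    obtain ⟨hi1, _, hi3, hi4, hi5⟩ := hinner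
    rw [List.foldl_cons]
    set g1 := (((List.range n).map (fun (k_ : Nat) => (n : Int) - 1 - (k_ : Int))).foldl
          (fun (st : List (List Int) × Int) r =>
            if get2 arr r.toNat x = 0 then st
            else (set2 st.1 st.2.toNat x (get2 arr r.toNat x), st.2 - 1))
          (g0, (n : Int) - 1)).1 with hg1def
    have hxnot : x ∉ xs := (List.nodup_cons.mp hnd).1
    have ihh := ih (fun i hi => hlt i (List.mem_cons_of_mem _ hi)) (List.nodup_cons.mp hnd).2
      g1 hi3 hi4
      (fun c hc => by
        rw [hi5 c (fun hcx => hxnot (hcx ▸ hc))]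
        exact hcols c (List.mem_cons_of_mem _ hc))
    refine ⟨?_, ?_, ihh.2.2.1, ihh.2.2.2⟩
    · intro c hc
      rcases List.mem_cons.mp hc with hcx | hcxs
      · subst hcx
        rw [ihh.2.1 c hxnot, hi1, show n - n = 0 by omega, List.drop_zero]
        rfl
      · exact ihh.1 c hcxs
    · intro c' hc'
      rw [ihh.2.1 c' (fun h => hc' (List.mem_cons_of_mem _ h)),
        hi5 c' (fun h => hc' (h ▸ List.mem_cons_self))]

theorem fall_eq (g : List (List Int)) :
    fall g = (List.range g.length).foldl (fun gg c =>
        (((List.range g.length).map (fun (k_ : Nat) => (g.length : Int) - 1 - (k_ : Int))).foldl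
          (fun (st : List (List Int) × Int) r =>
            if get2 g r.toNat c = 0 then st
            else (set2 st.1 st.2.toNat c (get2 g r.toNat c), st.2 - 1))
          (gg, (g.length : Int) - 1)).1)
      (List.replicate g.length (List.replicate g.length 0)) := by
  rw [← pyRange_desc]
  rfl

theorem replicate_grid_facts (n : Nat) :
    (List.replicate n (List.replicate n (0:Int))).length = n
    ∧ (∀ r, r < n → ((List.replicate n (List.replicate n (0:Int))).getD r []).length = n)
    ∧ (∀ c, c < n → colOf (List.replicate n (List.replicate n (0:Int))) n c = List.replicate n 0) := by
  refine ⟨by simp, ?_, ?_⟩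
  · intro r hr
    rw [List.getD_eq_getElem?_getD, List.getElem?_replicate, if_pos hr]
    simp
  · intro c hc
    apply eq_of_getD _ _ n (length_colOf _ _ _) (by simp)
    intro r hr
    rw [getD_colOf _ _ _ _ hr]
    simp [get2, List.getD_eq_getElem?_getD, List.getElem?_replicate, hr, hc]

theorem fall_colOf (g : List (List Int)) (c : Nat) (hc : c < g.length) :
    colOf (fall g) g.length c = settleB g.length (colOf g g.length c) := by
  rw [fall_eq]
  have h := fall_fold g g.length (List.range g.length)
    (fun i hi => List.mem_range.mp hi) List.nodup_range
    (List.replicate g.length (List.replicate g.length 0))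
    (replicate_grid_facts g.length).1 (replicate_grid_facts g.length).2.1
    (fun c' hc' => (replicate_grid_facts g.length).2.2 c' (List.mem_range.mp hc'))
  exact h.1 c (List.mem_range.mpr hc)

theorem fall_sq (g : List (List Int)) : Sq2 (fall g) g.length := by
  rw [fall_eq]
  have h := fall_fold g g.length (List.range g.length)
    (fun i hi => List.mem_range.mp hi) List.nodup_range
    (List.replicate g.length (List.replicate g.length 0))
    (replicate_grid_facts g.length).1 (replicate_grid_facts g.length).2.1
    (fun c' hc' => (replicate_grid_facts g.length).2.2 c' (List.mem_range.mp hc'))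
  exact ⟨h.2.2.1, h.2.2.2⟩

-- ---------- rotate ----------

theorem rot_inner (arr : List (List Int)) (n r : Nat) :
    ∀ (l : List Nat) (acc : List (List Int)), (∀ c ∈ l, c < n) → acc.length = n →
    (∀ r', r' < n → ((acc.getD r' []).length = n)) →
    (∀ i j, i < n → j < n →
      get2 (l.foldl (fun g c => set2 g c (n-1-r) (get2 arr r c)) acc) i j
        = if j = n-1-r ∧ i ∈ l then get2 arr r i else get2 acc i j)
    ∧ (l.foldl (fun g c => set2 g c (n-1-r) (get2 arr r c)) acc).length = n
    ∧ (∀ r', r' < n →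
        (((l.foldl (fun g c => set2 g c (n-1-r) (get2 arr r c)) acc).getD r' []).length = n)) := by
  intro l
  induction l with
  | nil =>
    intro acc _ hlen hrow
    refine ⟨fun i j hi hj => ?_, hlen, hrow⟩
    simp
  | cons c0 l' ih =>
    intro acc hlt hlen hrow
    have hc0 : c0 < n := hlt c0 List.mem_cons_self
    have hn : 0 < n := by omega
    rw [List.foldl_cons]
    have hlen1 : (set2 acc c0 (n-1-r) (get2 arr r c0)).length = n := by
      rw [length_set2]; exact hlen
    have hrow1 : ∀ r', r' < n → (((set2 acc c0 (n-1-r) (get2 arr r c0)).getD r' []).length = n) := by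
      intro r' hr'; rw [rowlen_set2]; exact hrow r' hr'
    have ihh := ih (set2 acc c0 (n-1-r) (get2 arr r c0))
      (fun c hc => hlt c (List.mem_cons_of_mem _ hc)) hlen1 hrow1
    refine ⟨fun i j hi hj => ?_, ihh.2.1, ihh.2.2⟩
    rw [ihh.1 i j hi hj]
    by_cases hin : j = n-1-r ∧ i ∈ l'
    · rw [if_pos hin, if_pos ⟨hin.1, List.mem_cons_of_mem _ hin.2⟩]
    · rw [if_neg hin]
      rw [get2_set2]
      by_cases hic : i = c0 ∧ j = n-1-r
      · rw [if_pos ⟨hic.1, hic.2, by rw [hrow c0 hc0]; omega⟩,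
          if_pos ⟨hic.2, hic.1 ▸ List.mem_cons_self⟩, hic.1]
      · rw [if_neg (fun hh => hic ⟨hh.1, hh.2.1⟩)]
        have hnot : ¬ (j = n-1-r ∧ i ∈ c0 :: l') := by
          intro hh
          rcases List.mem_cons.mp hh.2 with h1 | h1
          · exact hic ⟨h1, hh.1⟩
          · exact hin ⟨hh.1, h1⟩
        rw [if_neg hnot]

theorem rot_outer (arr : List (List Int)) (n : Nat) :
    ∀ (l : List Nat) (acc : List (List Int)), (∀ r ∈ l, r < n) → acc.length = n →
    (∀ r', r' < n → ((acc.getD r' []).length = n)) →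
    (∀ i j, i < n → j < n →
      get2 (l.foldl (fun g r => (List.range n).foldl
          (fun g c => set2 g c (n-1-r) (get2 arr r c)) g) acc) i j
        = if ∃ rr ∈ l, j = n-1-rr then get2 arr (n-1-j) i else get2 acc i j)
    ∧ (l.foldl (fun g r => (List.range n).foldl
          (fun g c => set2 g c (n-1-r) (get2 arr r c)) g) acc).length = n
    ∧ (∀ r', r' < n → (((l.foldl (fun g r => (List.range n).foldl
          (fun g c => set2 g c (n-1-r) (get2 arr r c)) g) acc).getD r' []).length = n)) := by
  intro l
  induction l with
  | nil =>
    intro acc _ hlen hrow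
    refine ⟨fun i j hi hj => ?_, hlen, hrow⟩
    simp
  | cons r0 l' ih =>
    intro acc hlt hlen hrow
    have hr0 : r0 < n := hlt r0 List.mem_cons_self
    rw [List.foldl_cons]
    have hinner := rot_inner arr n r0 (List.range n) acc
      (fun c hc => List.mem_range.mp hc) hlen hrow
    have ihh := ih _ (fun r hr => hlt r (List.mem_cons_of_mem _ hr))
      hinner.2.1 hinner.2.2
    refine ⟨fun i j hi hj => ?_, ihh.2.1, ihh.2.2⟩
    rw [ihh.1 i j hi hj]
    by_cases hex : ∃ rr ∈ l', j = n-1-rr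
    · have hex2 : ∃ rr ∈ r0 :: l', j = n-1-rr := by
        rcases hex with ⟨rr, h1, h2⟩
        exact ⟨rr, List.mem_cons_of_mem _ h1, h2⟩
      rw [if_pos hex, if_pos hex2]
    · rw [if_neg hex, hinner.1 i j hi hj]
      by_cases hj0 : j = n-1-r0
      · rw [if_pos ⟨hj0, List.mem_range.mpr hi⟩,
          if_pos ⟨r0, List.mem_cons_self, hj0⟩]
        congr 1
        omega
      · rw [if_neg (fun hh => hj0 hh.1)]
        have hnot : ¬ ∃ rr ∈ r0 :: l', j = n-1-rr := by
          rintro ⟨rr, hmem, hrr⟩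
          rcases List.mem_cons.mp hmem with h1 | h1
          · exact hj0 (h1 ▸ hrr)
          · exact hex ⟨rr, h1, hrr⟩
        rw [if_neg hnot]

theorem rotate_cell (g : List (List Int)) (i j : Nat)
    (hi : i < g.length) (hj : j < g.length) :
    get2 (rotate g) i j = get2 g (g.length - 1 - j) i := by
  unfold rotate
  have h := rot_outer g g.length (List.range g.length)
    (List.replicate g.length (List.replicate g.length 0))
    (fun r hr => List.mem_range.mp hr)
    (replicate_grid_facts g.length).1 (replicate_grid_facts g.length).2.1
  rw [h.1 i j hi hj, if_pos ⟨g.length - 1 - j, List.mem_range.mpr (by omega), by omega⟩]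

theorem rotate_len (g : List (List Int)) : (rotate g).length = g.length := by
  unfold rotate
  have h := rot_outer g g.length (List.range g.length)
    (List.replicate g.length (List.replicate g.length 0))
    (fun r hr => List.mem_range.mp hr)
    (replicate_grid_facts g.length).1 (replicate_grid_facts g.length).2.1
  exact h.2.1

-- ---------- reconstruction ----------

theorem reconstruct (h : List (List Int)) (n : Nat) (hsq : Sq2 h n) :
    (List.range n).map (fun r => (List.range n).map (fun c => get2 h r c)) = h := by
  rcases hsq with ⟨hlen, hrow⟩
  apply List.ext_getElem (by simp [hlen])
  intro r h1 h2
  simp only [List.getElem_map, List.getElem_range]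
  have hr2 : r < n := by simpa [hlen] using h2
  have hrg : h[r] = h.getD r [] := by
    rw [List.getD_eq_getElem?_getD, List.getElem?_eq_getElem h2]
    rfl
  have hrl : h[r].length = n := by rw [hrg]; exact hrow r hr2
  apply List.ext_getElem (by
    simp only [List.length_map, List.length_range]
    rw [hrl])
  intro c h3 h4
  simp only [List.getElem_map, List.getElem_range]
  show get2 h r c = h[r][c]
  unfold get2
  rw [← hrg, List.getD_eq_getElem?_getD, List.getElem?_eq_getElem h4]
  rfl

-- ---------- runCondCol characterisation ----------

theorem getD_repl_app (c : Nat) (v : Int) (ys : List Int) (t : Nat) :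
    (List.replicate c v ++ ys).getD t 0 = if t < c then v else ys.getD (t - c) 0 := by
  by_cases h : t < c
  · rw [if_pos h, List.getD_append _ _ _ _ (by simp [h])]
    simp [List.getD_eq_getElem?_getD, List.getElem?_replicate, h]
  · rw [if_neg h, List.getD_append_right _ _ _ _ (by simp; omega)]
    simp

theorem runCondCol_nil (m : Int) : ¬ runCondCol [] m := by
  rintro ⟨j, hj, _⟩
  simp at hj

theorem runCondCol_split (v : Int) (c : Nat) (ys : List Int) (m : Int)
    (hc : 1 ≤ c) (hys : ys = [] ∨ ys.getD 0 0 ≠ v) :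
    runCondCol (List.replicate c v ++ ys) m ↔ ((v ≠ 0 ∧ m ≤ (c : Int)) ∨ runCondCol ys m) := by
  have hlenL : (List.replicate c v ++ ys).length = c + ys.length := by simp
  constructor
  · rintro ⟨j, hj, i, hi, hnz, hrun, hm⟩
    rw [hlenL] at hj
    rw [getD_repl_app] at hnz
    by_cases hjc : j < c
    · left
      rw [if_pos (by omega)] at hnz
      exact ⟨hnz, by omega⟩
    · by_cases hic : i < c
      · exfalso
        have hysne : ys.getD 0 0 ≠ v := by
          rcases hys with h | h
          · subst h; simp at hj; omega
          · exact h
        have h1 := hrun c (by omega) (by omega)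
        rw [getD_repl_app, getD_repl_app, if_pos hic] at h1
        rw [if_neg (by omega)] at h1
        rw [show c - c = 0 by omega] at h1
        exact hysne h1
      · right
        rw [if_neg hic] at hnz
        refine ⟨j - c, by omega, i - c, by omega, hnz, ?_, by omega⟩
        intro t ht h2
        have h3 := hrun (t + c) (by omega) (by omega)
        rw [getD_repl_app, getD_repl_app, if_neg (by omega), if_neg (by omega),
          show t + c - c = t by omega] at h3
        exact h3
  · rintro (⟨hv, hm⟩ | ⟨j, hj, i, hi, hnz, hrun, hm⟩)
    · refine ⟨c - 1, by rw [hlenL]; omega, 0, by omega, ?_, ?_, by omega⟩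
      · rw [getD_repl_app, if_pos (by omega)]
        exact hv
      · intro t ht h2
        rw [getD_repl_app, getD_repl_app, if_pos (by omega), if_pos (by omega)]
    · refine ⟨j + c, by rw [hlenL]; omega, i + c, by omega, ?_, ?_, by omega⟩
      · rw [getD_repl_app, if_neg (by omega), show i + c - c = i by omega]
        exact hnz
      · intro t ht h2
        rw [getD_repl_app, getD_repl_app, if_neg (by omega), if_neg (by omega),
          show i + c - c = i by omega]
        exact hrun (t - c) (by omega) (by omega)

theorem replicate_eq_replicate_iff (c : Nat) (hc : 1 ≤ c) (a b : Int) :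
    List.replicate c a = List.replicate c b ↔ a = b := by
  constructor
  · intro h
    have := congrArg (fun l => l.getD 0 0) h
    simpa [List.getD_eq_getElem?_getD, List.getElem?_replicate, show 0 < c by omega] using this
  · intro h; rw [h]

theorem repl_shift (c : Nat) (v : Int) (xs : List Int) :
    List.replicate c v ++ v :: xs = List.replicate (c+1) v ++ xs := by
  rw [List.replicate_succ', List.append_assoc]
  rfl

theorem runsG (m : Int) : ∀ (xs : List Int) (v : Int) (c : Nat), 1 ≤ c →
    (blastR m (runsFrom v c xs) = List.replicate c v ++ xs
      ↔ ¬ runCondCol (List.replicate c v ++ xs) m) := by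
  intro xs
  induction xs with
  | nil =>
    intro v c hc
    have hsplit := runCondCol_split v c [] m hc (Or.inl rfl)
    rw [List.append_nil] at hsplit ⊢
    rw [hsplit]
    simp only [runsFrom, blastR, List.flatMap_cons, List.flatMap_nil, List.append_nil]
    rw [replicate_eq_replicate_iff c hc]
    constructor
    · intro h
      rintro (⟨hv, hm⟩ | hrc)
      · rw [if_pos hm] at h
        exact hv h.symm
      · exact runCondCol_nil m hrc
    · intro h
      by_cases hm : m ≤ (c : Int)
      · rw [if_pos hm]
        by_contra hv
        exact h (Or.inl ⟨fun hh => hv hh.symm, hm⟩)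
      · rw [if_neg hm]
  | cons x xs ih =>
    intro v c hc
    by_cases hx : x = v
    · subst hx
      rw [repl_shift]
      rw [show runsFrom x c (x :: xs) = runsFrom x (c+1) xs from by
        simp [runsFrom]]
      exact ih x (c+1) (by omega)
    · have hrw : runsFrom v c (x :: xs) = (v, c) :: runsFrom x 1 xs := by
        simp only [runsFrom, if_neg hx]
      rw [hrw]
      have hblast : blastR m ((v, c) :: runsFrom x 1 xs)
          = List.replicate c (if m ≤ (c : Int) then 0 else v) ++ blastR m (runsFrom x 1 xs) := by
        simp only [blastR, List.flatMap_cons]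
      rw [hblast]
      have hsplit := runCondCol_split v c (x :: xs) m hc
        (Or.inr (by simpa using fun hh => hx hh))
      rw [hsplit]
      have hlen1 : (List.replicate c (if m ≤ (c : Int) then (0:Int) else v)).length
          = (List.replicate c v).length := by simp
      constructor
      · intro h
        have hinj := List.append_inj h hlen1
        rintro (⟨hv, hm⟩ | hrc)
        · have h1 := (replicate_eq_replicate_iff c hc _ _).mp hinj.1
          rw [if_pos hm] at h1
          exact hv h1.symm
        · have h2 := hinj.2
          rw [show (x :: xs) = List.replicate 1 x ++ xs from rfl] at h2
          exact ((ih x 1 (le_refl 1)).mp h2) (by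
            rwa [show List.replicate 1 x ++ xs = x :: xs from rfl])
      · intro h
        have hnc : ¬ (v ≠ 0 ∧ m ≤ (c : Int)) := fun hh => h (Or.inl hh)
        have hnr : ¬ runCondCol (x :: xs) m := fun hh => h (Or.inr hh)
        have h1 : (if m ≤ (c : Int) then (0:Int) else v) = v := by
          by_cases hm : m ≤ (c : Int)
          · rw [if_pos hm]
            by_contra hv
            exact hnc ⟨fun hh => hv hh.symm, hm⟩
          · rw [if_neg hm]
        have h2 : blastR m (runsFrom x 1 xs) = x :: xs := by
          rw [show (x :: xs) = List.replicate 1 x ++ xs from rfl]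
          exact (ih x 1 (le_refl 1)).mpr (by
            rwa [show List.replicate 1 x ++ xs = x :: xs from rfl])
        rw [h1, h2]

theorem blastM_ne_iff (m : Int) (col : List Int) :
    blastM m col ≠ col ↔ runCondCol col m := by
  cases col with
  | nil =>
    simp only [blastM, ne_eq, not_true_eq_false, false_iff]
    exact runCondCol_nil m
  | cons x xs =>
    have h := runsG m xs x 1 (le_refl 1)
    rw [show List.replicate 1 x ++ xs = x :: xs from rfl] at h
    show ¬ (blastR m (runsFrom x 1 xs) = x :: xs) ↔ _
    rw [h]
    exact not_not

-- ---------- isBombRemaining bridge ----------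

theorem ne_map_range_iff (n : Nat) (f h : Nat → Int) :
    ((List.range n).map f ≠ (List.range n).map h) ↔ ∃ r, r < n ∧ f r ≠ h r := by
  constructor
  · intro hne
    by_contra hc
    push_neg at hc
    exact hne (List.map_inj_left.mpr (fun a ha => hc a (List.mem_range.mp ha)))
  · rintro ⟨r, hr, hner⟩ heq
    apply hner
    have h1 := congrArg (fun l => l.getD r 0) heq
    simpa [PySem.List.getD_map_range, hr] using h1

theorem isBomb_true_iff (g : List (List Int)) (m : Int) (n : Nat) (hGe : Ge2 g n) :
    isBombRemaining g m = true ↔ ∃ c, c < n ∧ runCondCol (colOf g n c) m := by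
  obtain ⟨hlen, hrow⟩ := hGe
  subst hlen
  unfold isBombRemaining
  simp only [List.any_eq_true, List.mem_range, bne_iff_ne]
  constructor
  · rintro ⟨i, hi, j, hj, hne⟩
    refine ⟨j, hj, ?_⟩
    rw [← blastM_ne_iff]
    intro heq
    apply hne
    have h1 : colOf (explode g m) g.length j = colOf g g.length j := by
      rw [explode_colOf g m g.length ⟨rfl, hrow⟩ j hj, heq]
    have h2 := congrArg (fun l => l.getD i 0) h1
    simp only [getD_colOf (explode g m) g.length j i hi, getD_colOf g g.length j i hi] at h2
    exact h2.symm
  · rintro ⟨c, hc, hrc⟩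
    have hne : blastM m (colOf g g.length c) ≠ colOf g g.length c := (blastM_ne_iff m _).mpr hrc
    rw [← explode_colOf g m g.length ⟨rfl, hrow⟩ c hc] at hne
    unfold colOf at hne
    rcases (ne_map_range_iff g.length _ _).mp hne with ⟨r, hr, hner⟩
    exact ⟨r, hr, c, hc, fun hh => hner hh.symm⟩

theorem Ge2_of_Sq2 (g : List (List Int)) (n : Nat) (h : Sq2 g n) : Ge2 g n :=
  ⟨h.1, fun r hr => le_of_eq (h.2 r hr).symm⟩

-- ============================================================
-- B-side lemmas
-- ============================================================

-- rleB computes the runs of its input (runsFrom with Int-cast counts)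
theorem rleB_foldl : ∀ (xs : List Int) (acc : List (Int × Int)) (v : Int) (c : Nat),
    List.foldl (fun runs v =>
      match runs.getLast? with
      | some wc => if wc.1 = v then runs.dropLast ++ [(wc.1, wc.2 + 1)] else runs ++ [(v, 1)]
      | none => [(v, 1)]) (acc ++ [(v, (c : Int))]) xs
      = acc ++ (runsFrom v c xs).map (fun p => (p.1, ((p.2 : Nat) : Int))) := by
  intro xs
  induction xs with
  | nil => intro acc v c; simp [runsFrom]
  | cons x xs ih =>
    intro acc v c
    rw [List.foldl_cons]
    have hlast : (acc ++ [(v, (c : Int))]).getLast? = some (v, (c : Int)) := List.getLast?_concat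
    simp only [hlast]
    by_cases hx : v = x
    · rw [if_pos hx, List.dropLast_concat]
      have hc1 : ((c : Int) + 1) = (((c + 1 : Nat)) : Int) := by push_cast; ring
      rw [hc1, ih acc v (c+1)]
      simp only [runsFrom, if_pos hx.symm]
    · rw [if_neg hx]
      rw [show (acc ++ [(v, (c : Int))]) ++ [(x, (1 : Int))]
            = (acc ++ [(v, (c : Int))]) ++ [(x, ((1 : Nat) : Int))] by norm_num]
      rw [ih (acc ++ [(v, (c : Int))]) x 1]
      have hr : runsFrom v c (x :: xs) = (v, c) :: runsFrom x 1 xs := by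
        simp only [runsFrom]
        rw [if_neg (fun hh : x = v => hx hh.symm)]
      rw [hr]
      simp [List.append_assoc]

theorem rleB_eq (x : Int) (xs : List Int) :
    rleB (x :: xs) = (runsFrom x 1 xs).map (fun p => (p.1, ((p.2 : Nat) : Int))) := by
  unfold rleB
  rw [List.foldl_cons]
  have h0 := rleB_foldl xs [] x 1
  simpa using h0

-- ---------- runsFrom facts ----------

theorem runsFrom_expand : ∀ (xs : List Int) (v : Int) (c : Nat),
    expandR (runsFrom v c xs) = List.replicate c v ++ xs := by
  intro xs
  induction xs with
  | nil => intro v c; simp [runsFrom, expandR]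
  | cons x xs ih =>
    intro v c
    by_cases hx : x = v
    · subst hx
      rw [show runsFrom x c (x :: xs) = runsFrom x (c+1) xs from by simp [runsFrom],
        ih, repl_shift]
    · rw [show runsFrom v c (x :: xs) = (v, c) :: runsFrom x 1 xs from by
        simp only [runsFrom]; rw [if_neg hx]]
      unfold expandR at ih ⊢
      rw [List.flatMap_cons, ih x 1]
      simp

theorem runs_counts_pos : ∀ (xs : List Int) (v : Int) (c : Nat), 1 ≤ c →
    ∀ p ∈ runsFrom v c xs, 1 ≤ p.2 := by
  intro xs
  induction xs with
  | nil => intro v c hc p hp; simp [runsFrom] at hp; subst hp; exact hc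
  | cons x xs ih =>
    intro v c hc p hp
    by_cases hx : x = v
    · subst hx
      rw [show runsFrom x c (x :: xs) = runsFrom x (c+1) xs from by simp [runsFrom]] at hp
      exact ih x (c+1) (by omega) p hp
    · rw [show runsFrom v c (x :: xs) = (v, c) :: runsFrom x 1 xs from by
        simp only [runsFrom]; rw [if_neg hx]] at hp
      rcases List.mem_cons.mp hp with h | h
      · subst h; exact hc
      · exact ih x 1 (le_refl 1) p h

theorem runs_vals_mem : ∀ (xs : List Int) (v : Int) (c : Nat),
    ∀ p ∈ runsFrom v c xs, p.1 = v ∨ p.1 ∈ xs := by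
  intro xs
  induction xs with
  | nil => intro v c p hp; simp [runsFrom] at hp; subst hp; left; rfl
  | cons x xs ih =>
    intro v c p hp
    by_cases hx : x = v
    · subst hx
      rw [show runsFrom x c (x :: xs) = runsFrom x (c+1) xs from by simp [runsFrom]] at hp
      rcases ih x (c+1) p hp with h | h
      · left; exact h
      · right; exact List.mem_cons_of_mem _ h
    · rw [show runsFrom v c (x :: xs) = (v, c) :: runsFrom x 1 xs from by
        simp only [runsFrom]; rw [if_neg hx]] at hp
      rcases List.mem_cons.mp hp with h | h
      · subst h; left; rfl
      · rcases ih x 1 p h with h2 | h2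
        · right; rw [h2]; exact List.mem_cons_self
        · right; exact List.mem_cons_of_mem _ h2

-- any bombing run ↔ runCondCol
theorem anyRuns (m : Int) : ∀ (xs : List Int) (v : Int) (c : Nat), 1 ≤ c →
    (((runsFrom v c xs).any (fun p => p.1 != 0 && decide (m ≤ (p.2 : Int)))) = true
      ↔ runCondCol (List.replicate c v ++ xs) m) := by
  intro xs
  induction xs with
  | nil =>
    intro v c hc
    have hsplit := runCondCol_split v c [] m hc (Or.inl rfl)
    rw [List.append_nil] at hsplit
    rw [List.append_nil, hsplit]
    simp only [runsFrom, List.any_cons, List.any_nil, Bool.or_false, Bool.and_eq_true,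
      bne_iff_ne, ne_eq, decide_eq_true_eq]
    constructor
    · rintro ⟨h1, h2⟩
      exact Or.inl ⟨h1, h2⟩
    · rintro (⟨h1, h2⟩ | hrc)
      · exact ⟨h1, h2⟩
      · exact absurd hrc (runCondCol_nil m)
  | cons x xs ih =>
    intro v c hc
    by_cases hx : x = v
    · subst hx
      rw [show runsFrom x c (x :: xs) = runsFrom x (c+1) xs from by simp [runsFrom],
        repl_shift]
      exact ih x (c+1) (by omega)
    · rw [show runsFrom v c (x :: xs) = (v, c) :: runsFrom x 1 xs from by
        simp only [runsFrom]; rw [if_neg hx]]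
      have hsplit := runCondCol_split v c (x :: xs) m hc
        (Or.inr (by simpa using fun hh => hx hh))
      rw [hsplit]
      have hrest := ih x 1 (le_refl 1)
      rw [show List.replicate 1 x ++ xs = x :: xs from rfl] at hrest
      rw [List.any_cons]
      simp only [Bool.or_eq_true, Bool.and_eq_true, bne_iff_ne, ne_eq, decide_eq_true_eq]
      rw [hrest]

-- ---------- crushB / crush0 bridge ----------

theorem filter_blastR (m : Int) : ∀ (rs : List (Int × Nat)),
    (blastR m rs).filter (fun v => v != 0)
      = rs.flatMap (fun vc =>
          if vc.1 ≠ 0 ∧ ¬ m ≤ (vc.2 : Int) then List.replicate vc.2 vc.1 else []) := by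
  intro rs
  induction rs with
  | nil => rfl
  | cons p ps ih =>
    rcases p with ⟨v, c⟩
    simp only [blastR, List.flatMap_cons] at ih ⊢
    rw [List.filter_append, ih]
    congr 1
    by_cases hm : m ≤ (c : Int)
    · rw [if_pos hm, if_neg (by tauto)]
      simp
    · rw [if_neg hm]
      by_cases hv : v = 0
      · subst hv
        rw [if_neg (by tauto)]
        simp
      · rw [if_pos ⟨hv, hm⟩]
        rw [List.filter_eq_self.mpr]
        intro a ha
        rw [List.eq_of_mem_replicate ha]
        simpa using hv

theorem crushB_eq (m : Int) (stack : List Int) : crushB m stack = crush0 m stack := by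
  cases stack with
  | nil => rfl
  | cons x xs =>
    unfold crushB crush0 blastM
    rw [rleB_eq, filter_blastR, List.flatMap_map]
    congr 1
    funext p
    simp only [Function.comp]
    by_cases h1 : p.1 ≠ 0 ∧ (p.2 : Int) < m
    · rw [if_pos (by exact ⟨h1.1, by omega⟩), if_pos (by exact ⟨h1.1, not_le.mpr h1.2⟩)]
      simp
    · rw [if_neg (by
        rintro ⟨ha, hb⟩
        exact h1 ⟨ha, by omega⟩), if_neg (by
        rintro ⟨ha, hb⟩
        exact h1 ⟨ha, not_le.mp hb⟩)]

theorem flatMap_congr_mem {α β : Type} : ∀ (l : List α) (f g : α → List β),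
    (∀ a ∈ l, f a = g a) → l.flatMap f = l.flatMap g := by
  intro l
  induction l with
  | nil => intros; rfl
  | cons x xs ih =>
    intro f g h
    rw [List.flatMap_cons, List.flatMap_cons, h x List.mem_cons_self,
      ih f g (fun a ha => h a (List.mem_cons_of_mem _ ha))]


theorem crushLoopB_eq (m : Int) (stack : List Int) (hz : ∀ v ∈ stack, v ≠ 0) :
    crushLoopB m stack = crushB m stack := by
  cases stack with
  | nil => rfl
  | cons x xs =>
    show (rleB (x::xs)).flatMap (fun vc => if vc.2 < m then List.replicate vc.2.toNat vc.1 else [])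
      = (rleB (x::xs)).flatMap (fun vc => if vc.1 ≠ 0 ∧ vc.2 < m then List.replicate vc.2.toNat vc.1 else [])
    rw [rleB_eq, List.flatMap_map, List.flatMap_map]
    apply flatMap_congr_mem
    intro p hp
    simp only [Function.comp]
    have hv : p.1 ≠ 0 := by
      rcases runs_vals_mem xs x 1 p hp with h | h
      · rw [h]; exact hz x List.mem_cons_self
      · exact hz p.1 (List.mem_cons_of_mem _ h)
    by_cases hm : ((p.2 : Nat) : Int) < m
    · rw [if_pos hm, if_pos ⟨hv, hm⟩]
    · rw [if_neg hm, if_neg (by rintro ⟨_, hb⟩; exact hm hb)]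

-- bomb tests
theorem bombAny_iff (m : Int) (s : List Int) :
    ((rleB s).any (fun vc => vc.1 != 0 && decide (m ≤ vc.2)) = true) ↔ runCondCol s m := by
  cases s with
  | nil =>
    constructor
    · intro h
      simp [rleB] at h
    · intro h
      exact absurd h (runCondCol_nil m)
  | cons x xs =>
    rw [rleB_eq, List.any_map]
    have h := anyRuns m xs x 1 (le_refl 1)
    rw [show List.replicate 1 x ++ xs = x :: xs from rfl] at h
    rw [← h]
    rfl

theorem bombAnyZF_iff (m : Int) (s : List Int) (hz : ∀ v ∈ s, v ≠ 0) :
    ((rleB s).any (fun vc => decide (m ≤ vc.2)) = true) ↔ runCondCol s m := by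
  rw [← bombAny_iff]
  cases s with
  | nil => simp [rleB]
  | cons x xs =>
    rw [rleB_eq, List.any_map, List.any_map]
    constructor <;> intro h <;> rcases List.any_eq_true.mp h with ⟨p, hp, hcond⟩ <;>
      apply List.any_eq_true.mpr <;> refine ⟨p, hp, ?_⟩
    · have hv : p.1 ≠ 0 := by
        rcases runs_vals_mem xs x 1 p hp with h2 | h2
        · rw [h2]; exact hz x List.mem_cons_self
        · exact hz p.1 (List.mem_cons_of_mem _ h2)
      simp only [Function.comp] at hcond ⊢
      simp only [Bool.and_eq_true, bne_iff_ne, ne_eq]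
      exact ⟨hv, by simpa using hcond⟩
    · simp only [Function.comp, Bool.and_eq_true] at hcond
      simpa using hcond.2

-- length lemmas
theorem sum_le_sum_list {α : Type} : ∀ (l : List α) (f g : α → Nat),
    (∀ x ∈ l, f x ≤ g x) → (l.map f).sum ≤ (l.map g).sum := by
  intro l
  induction l with
  | nil => intros; simp
  | cons x xs ih =>
    intro f g h
    simp only [List.map_cons, List.sum_cons]
    have := ih f g (fun a ha => h a (List.mem_cons_of_mem _ ha))
    have := h x List.mem_cons_self
    omega

theorem sum_lt_sum_list {α : Type} : ∀ (l : List α) (f g : α → Nat),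
    (∀ x ∈ l, f x ≤ g x) → (∃ x ∈ l, f x < g x) → (l.map f).sum < (l.map g).sum := by
  intro l
  induction l with
  | nil => rintro f g _ ⟨x, hx, _⟩; exact absurd hx (List.not_mem_nil)
  | cons x xs ih =>
    rintro f g hle ⟨y, hy, hlt⟩
    simp only [List.map_cons, List.sum_cons]
    rcases List.mem_cons.mp hy with h | h
    · subst h
      have := sum_le_sum_list xs f g (fun a ha => hle a (List.mem_cons_of_mem _ ha))
      omega
    · have := ih f g (fun a ha => hle a (List.mem_cons_of_mem _ ha)) ⟨y, h, hlt⟩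
      have := hle x List.mem_cons_self
      omega

theorem length_expandR (rs : List (Int × Nat)) :
    (expandR rs).length = (rs.map (fun p => p.2)).sum := by
  unfold expandR
  rw [List.length_flatMap]
  congr 1
  apply List.map_congr_left
  intro p _
  simp

theorem crush0_formula (m : Int) (x : Int) (xs : List Int) :
    crush0 m (x :: xs) = (runsFrom x 1 xs).flatMap (fun vc =>
      if vc.1 ≠ 0 ∧ ¬ m ≤ (vc.2 : Int) then List.replicate vc.2 vc.1 else []) := by
  unfold crush0 blastM
  rw [filter_blastR]

theorem filter_nz_formula (x : Int) (xs : List Int) :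
    (x :: xs).filter (fun v => v != 0) = (runsFrom x 1 xs).flatMap (fun vc =>
      if vc.1 ≠ 0 then List.replicate vc.2 vc.1 else []) := by
  conv_lhs => rw [show (x :: xs) = List.replicate 1 x ++ xs from rfl, ← runsFrom_expand xs x 1]
  unfold expandR
  rw [List.filter_flatMap]
  apply flatMap_congr_mem
  intro p _
  by_cases hv : p.1 = 0
  · rw [if_neg (by simpa using hv)]
    rw [List.filter_eq_nil_iff.mpr]
    intro a ha
    rw [List.eq_of_mem_replicate ha, hv]
    simp
  · rw [if_pos hv, List.filter_eq_self.mpr]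
    intro a ha
    rw [List.eq_of_mem_replicate ha]
    simpa using hv

theorem crush0_le (m : Int) (s : List Int) : (crush0 m s).length ≤ s.length := by
  cases s with
  | nil => simp [crush0, blastM]
  | cons x xs =>
    rw [crush0_formula]
    conv_rhs => rw [show (x :: xs) = List.replicate 1 x ++ xs from rfl,
      ← runsFrom_expand xs x 1]
    rw [List.length_flatMap, length_expandR]
    rw [show (runsFrom x 1 xs).map (fun p => p.2)
        = (runsFrom x 1 xs).map (fun p => (List.replicate p.2 p.1).length) from by
      apply List.map_congr_left; intro p _; simp]
    apply sum_le_sum_list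
    intro p _
    split
    · simp
    · simp

theorem crush0_lt (m : Int) (s : List Int) (h : runCondCol s m) :
    (crush0 m s).length < s.length := by
  cases s with
  | nil => exact absurd h (runCondCol_nil m)
  | cons x xs =>
    rw [crush0_formula]
    conv_rhs => rw [show (x :: xs) = List.replicate 1 x ++ xs from rfl,
      ← runsFrom_expand xs x 1]
    rw [List.length_flatMap, length_expandR]
    rw [show (runsFrom x 1 xs).map (fun p => p.2)
        = (runsFrom x 1 xs).map (fun p => (List.replicate p.2 p.1).length) from by
      apply List.map_congr_left; intro p _; simp]
    apply sum_lt_sum_list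
    · intro p _
      split
      · simp
      · simp
    · have hany := (anyRuns m xs x 1 (le_refl 1)).mpr
        (by rwa [show List.replicate 1 x ++ xs = x :: xs from rfl])
      rcases List.any_eq_true.mp hany with ⟨p, hp, hcond⟩
      simp only [Bool.and_eq_true, bne_iff_ne, ne_eq, decide_eq_true_eq] at hcond
      refine ⟨p, hp, ?_⟩
      rw [if_neg (by rintro ⟨_, hb⟩; exact hb hcond.2)]
      have := runs_counts_pos xs x 1 (le_refl 1) p hp
      simp
      omega

theorem crush0_le_filter (m : Int) (s : List Int) :
    (crush0 m s).length ≤ (s.filter (fun v => v != 0)).length := by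
  cases s with
  | nil => simp [crush0, blastM]
  | cons x xs =>
    rw [crush0_formula, filter_nz_formula, List.length_flatMap, List.length_flatMap]
    apply sum_le_sum_list
    intro p _
    by_cases h1 : p.1 ≠ 0 ∧ ¬ m ≤ ((p.2 : Nat) : Int)
    · rw [if_pos h1, if_pos h1.1]
    · rw [if_neg h1]
      split <;> simp

theorem crush0_lt_filter (m : Int) (s : List Int) (h : runCondCol s m) :
    (crush0 m s).length < (s.filter (fun v => v != 0)).length := by
  cases s with
  | nil => exact absurd h (runCondCol_nil m)
  | cons x xs =>
    rw [crush0_formula, filter_nz_formula, List.length_flatMap, List.length_flatMap]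
    apply sum_lt_sum_list
    · intro p _
      by_cases h1 : p.1 ≠ 0 ∧ ¬ m ≤ ((p.2 : Nat) : Int)
      · rw [if_pos h1, if_pos h1.1]
      · rw [if_neg h1]
        split <;> simp
    · have hany := (anyRuns m xs x 1 (le_refl 1)).mpr
        (by rwa [show List.replicate 1 x ++ xs = x :: xs from rfl])
      rcases List.any_eq_true.mp hany with ⟨p, hp, hcond⟩
      simp only [Bool.and_eq_true, bne_iff_ne, ne_eq, decide_eq_true_eq] at hcond
      refine ⟨p, hp, ?_⟩
      rw [if_neg (by rintro ⟨_, hb⟩; exact hb hcond.2), if_pos hcond.1]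
      have := runs_counts_pos xs x 1 (le_refl 1) p hp
      simp
      omega

-- ---------- pad lemmas ----------

theorem padS_trivial (n : Nat) (s : List Int) (h : n ≤ s.length) : padS n s = s := by
  unfold padS
  rw [show n - s.length = 0 by omega]
  rfl

theorem runCond_padS (m : Int) (n : Nat) (s : List Int) (hz : ∀ v ∈ s, v ≠ 0) :
    runCondCol (padS n s) m ↔ runCondCol s m := by
  by_cases hlen : n ≤ s.length
  · rw [padS_trivial n s hlen]
  · have hz1 : 1 ≤ n - s.length := by omega
    unfold padS
    cases s with
    | nil =>
      rw [List.append_nil]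
      constructor
      · intro h
        have := (runCondCol_split 0 (n - List.length ([] : List Int)) [] m hz1 (Or.inl rfl)).mp
          (by rwa [List.append_nil])
        rcases this with ⟨h1, _⟩ | h2
        · exact absurd rfl h1
        · exact h2
      · intro h
        exact absurd h (runCondCol_nil m)
    | cons x xs =>
      have hx : x ≠ 0 := hz x List.mem_cons_self
      rw [runCondCol_split 0 (n - (x::xs).length) (x::xs) m hz1
        (Or.inr (by simpa using fun hh => hx hh))]
      constructor
      · rintro (⟨h1, _⟩ | h2)
        · exact absurd rfl h1
        · exact h2
      · intro h
        exact Or.inr h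

theorem runsFrom_zero_repl : ∀ (t : Nat) (c : Nat) (rest : List Int) (v : Int),
    runsFrom v c (List.replicate t v ++ rest) = runsFrom v (c + t) rest := by
  intro t
  induction t with
  | zero => intro c rest v; simp
  | succ t ih =>
    intro c rest v
    rw [List.replicate_succ, List.cons_append,
      show runsFrom v c (v :: (List.replicate t v ++ rest)) = runsFrom v (c+1) (List.replicate t v ++ rest) from by
        simp [runsFrom]]
    rw [ih (c+1) rest v]
    congr 1
    omega

theorem crush0_padS (m : Int) (n : Nat) (s : List Int) (hz : ∀ v ∈ s, v ≠ 0) :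
    crush0 m (padS n s) = crush0 m s := by
  by_cases hlen : n ≤ s.length
  · rw [padS_trivial n s hlen]
  · unfold padS
    have hz1 : 1 ≤ n - s.length := by omega
    set z := n - s.length with hzdef
    obtain ⟨z', hz'⟩ : ∃ z', z = z' + 1 := ⟨z - 1, by omega⟩
    rw [hz', List.replicate_succ, List.cons_append]
    cases s with
    | nil =>
      rw [List.append_nil]
      show crush0 m (0 :: List.replicate z' 0) = crush0 m []
      rw [crush0_formula]
      rw [show List.replicate z' (0:Int) = List.replicate z' (0:Int) ++ [] from by simp,
        runsFrom_zero_repl z' 1 [] 0]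
      simp only [runsFrom]
      rw [List.flatMap_cons, List.flatMap_nil]
      rw [if_neg (by rintro ⟨ha, _⟩; exact ha rfl)]
      rfl
    | cons x xs =>
      have hx : x ≠ 0 := hz x List.mem_cons_self
      show crush0 m (0 :: (List.replicate z' 0 ++ x :: xs)) = crush0 m (x :: xs)
      rw [crush0_formula, runsFrom_zero_repl z' 1 (x :: xs) 0]
      rw [show runsFrom 0 (1 + z') (x :: xs) = (0, 1 + z') :: runsFrom x 1 xs from by
        simp only [runsFrom]; rw [if_neg hx]]
      rw [List.flatMap_cons, if_neg (by rintro ⟨ha, _⟩; exact ha rfl), List.nil_append]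
      rw [crush0_formula]

-- ---------- the per-column fixpoint ----------

def FixS (m : Int) (s : List Int) : List Int := stabLoopB m (s.length + 1) s

theorem crush0_zero_free (m : Int) (s : List Int) : ∀ v ∈ crush0 m s, v ≠ 0 := by
  intro v hv
  have := List.of_mem_filter hv
  simpa using this

theorem crush0_of_not (m : Int) (s : List Int) (h : ¬ runCondCol s m) :
    crush0 m s = s.filter (fun v => v != 0) := by
  unfold crush0
  rw [of_not_not ((not_iff_not.mpr (blastM_ne_iff m s)).mpr h)]

theorem crush0_of_not_zf (m : Int) (s : List Int) (hz : ∀ v ∈ s, v ≠ 0)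
    (h : ¬ runCondCol s m) : crush0 m s = s := by
  rw [crush0_of_not m s h]
  apply List.filter_eq_self.mpr
  intro v hv
  simpa using hz v hv

theorem stabLoop_step_pos (m : Int) (F : Nat) (s : List Int) (hz : ∀ v ∈ s, v ≠ 0)
    (h : runCondCol s m) : stabLoopB m (F+1) s = stabLoopB m F (crush0 m s) := by
  show (if (rleB s).any (fun vc => decide (m ≤ vc.2)) then stabLoopB m F (crushLoopB m s) else s) = _
  rw [if_pos ((bombAnyZF_iff m s hz).mpr h), crushLoopB_eq m s hz, crushB_eq]

theorem stabLoop_step_neg (m : Int) (F : Nat) (s : List Int) (hz : ∀ v ∈ s, v ≠ 0)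
    (h : ¬ runCondCol s m) : stabLoopB m (F+1) s = s := by
  show (if (rleB s).any (fun vc => decide (m ≤ vc.2)) then stabLoopB m F (crushLoopB m s) else s) = _
  rw [if_neg (by
    intro hb
    exact h ((bombAnyZF_iff m s hz).mp hb))]

theorem stabLoop_fuel (m : Int) : ∀ (L : Nat) (s : List Int), (∀ v ∈ s, v ≠ 0) →
    s.length ≤ L → ∀ F1 F2, s.length < F1 → s.length < F2 →
    stabLoopB m F1 s = stabLoopB m F2 s := by
  intro L
  induction L with
  | zero =>
    intro s hz hL F1 F2 h1 h2
    obtain ⟨F1', rfl⟩ : ∃ F', F1 = F' + 1 := ⟨F1 - 1, by omega⟩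
    obtain ⟨F2', rfl⟩ : ∃ F', F2 = F' + 1 := ⟨F2 - 1, by omega⟩
    have hnil : s = [] := List.eq_nil_of_length_eq_zero (by omega)
    subst hnil
    rw [stabLoop_step_neg m F1' [] hz (runCondCol_nil m),
      stabLoop_step_neg m F2' [] hz (runCondCol_nil m)]
  | succ L ih =>
    intro s hz hL F1 F2 h1 h2
    obtain ⟨F1', rfl⟩ : ∃ F', F1 = F' + 1 := ⟨F1 - 1, by omega⟩
    obtain ⟨F2', rfl⟩ : ∃ F', F2 = F' + 1 := ⟨F2 - 1, by omega⟩
    by_cases h : runCondCol s m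
    · rw [stabLoop_step_pos m F1' s hz h, stabLoop_step_pos m F2' s hz h]
      have hlt := crush0_lt m s h
      exact ih (crush0 m s) (crush0_zero_free m s) (by omega) F1' F2' (by omega) (by omega)
    · rw [stabLoop_step_neg m F1' s hz h, stabLoop_step_neg m F2' s hz h]

theorem FixS_of_not (m : Int) (s : List Int) (hz : ∀ v ∈ s, v ≠ 0)
    (h : ¬ runCondCol s m) : FixS m s = s := by
  unfold FixS
  exact stabLoop_step_neg m s.length s hz h

theorem FixS_of_bomb (m : Int) (s : List Int) (hz : ∀ v ∈ s, v ≠ 0)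
    (h : runCondCol s m) : FixS m s = FixS m (crush0 m s) := by
  unfold FixS
  rw [stabLoop_step_pos m s.length s hz h]
  exact stabLoop_fuel m (crush0 m s).length (crush0 m s) (crush0_zero_free m s) (le_refl _)
    s.length ((crush0 m s).length + 1) (crush0_lt m s h) (by omega)

theorem stabilizeB_eq (m : Int) (stack : List Int) :
    stabilizeB m stack = FixS m (crush0 m stack) := by
  unfold stabilizeB FixS
  rw [crushB_eq]

theorem FixS_props (m : Int) : ∀ (L : Nat) (s : List Int), s.length ≤ L →
    (∀ v ∈ s, v ≠ 0) →
    (∀ v ∈ FixS m s, v ≠ 0) ∧ (FixS m s).length ≤ s.length := by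
  intro L
  induction L with
  | zero =>
    intro s hL hz
    have hnil : s = [] := List.eq_nil_of_length_eq_zero (by omega)
    subst hnil
    rw [FixS_of_not m [] hz (runCondCol_nil m)]
    exact ⟨hz, le_refl _⟩
  | succ L ih =>
    intro s hL hz
    by_cases h : runCondCol s m
    · rw [FixS_of_bomb m s hz h]
      have hlt := crush0_lt m s h
      have := ih (crush0 m s) (by omega) (crush0_zero_free m s)
      exact ⟨this.1, le_trans this.2 (by omega)⟩
    · rw [FixS_of_not m s hz h]
      exact ⟨hz, le_refl _⟩

theorem getD_padS (n : Nat) (s : List Int) (r : Nat) :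
    (padS n s).getD r 0 = if r < n - s.length then 0 else s.getD (r - (n - s.length)) 0 := by
  unfold padS
  rw [getD_repl_app]

theorem filter_padS (n : Nat) (s : List Int) (hz : forall v, v ∈ s -> v ≠ 0) :
    (padS n s).filter (fun v => v != 0) = s := by
  unfold padS
  rw [List.filter_append]
  have h1 : (List.replicate (n - s.length) (0:Int)).filter (fun v => v != 0) = [] := by
    simp
  rw [h1, List.nil_append]
  apply List.filter_eq_self.mpr
  intro v hv
  simpa using hz v hv

theorem settleB_eq_padS (n : Nat) (col : List Int) :
    settleB n col = padS n (col.filter (fun v => v != 0)) := rfl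

-- ============================================================
-- the global stabilisation loop equals per-column fixpoints
-- ============================================================

def sumLen (n : Nat) (σ : Nat → List Int) : Nat :=
  ((List.range n).map (fun c => (σ c).length)).sum

theorem boardColsOf_eq_map (g : List (List Int)) (n : Nat) :
    boardColsOf g n = (List.range n).map (fun c => colOf g n c) := rfl

theorem nz_eq_sumLen (g : List (List Int)) (n : Nat) (σ : Nat → List Int)
    (hrep : ∀ c, c < n → colOf g n c = padS n (σ c) ∧ (∀ v ∈ σ c, v ≠ 0)) :
    nzCount (boardColsOf g n) = sumLen n σ := by
  unfold nzCount sumLen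
  rw [boardColsOf_eq_map, List.map_map]
  congr 1
  apply List.map_congr_left
  intro c hc
  have hc' : c < n := List.mem_range.mp hc
  simp only [Function.comp]
  rw [(hrep c hc').1, filter_padS n (σ c) (hrep c hc').2]

theorem whileA_fix (m : Int) (n : Nat) : ∀ (fuel : Nat) (g : List (List Int)) (σ : Nat → List Int),
    Ge2 g n →
    (∀ c, c < n → colOf g n c = padS n (σ c) ∧ (∀ v ∈ σ c, v ≠ 0) ∧ (σ c).length ≤ n) →
    sumLen n σ < fuel →
    (∀ c, c < n → colOf (whileA m fuel g) n c = padS n (FixS m (σ c))) ∧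
      Ge2 (whileA m fuel g) n := by
  intro fuel
  induction fuel with
  | zero => intro g σ _ _ hs; omega
  | succ fuel ih =>
    intro g σ hGe hrep hs
    show (∀ c, c < n → colOf (if isBombRemaining g m then whileA m fuel (fall (explode g m)) else g) n c
        = padS n (FixS m (σ c))) ∧ Ge2 (if isBombRemaining g m then whileA m fuel (fall (explode g m)) else g) n
    by_cases hb : isBombRemaining g m = true
    · rw [if_pos hb]
      have hexlen : (explode g m).length = n := (explode_struct g m n hGe).1
      have hcols : ∀ c, c < n → colOf (fall (explode g m)) n c = padS n (crush0 m (σ c)) := by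
        intro c hc
        have h1 := fall_colOf (explode g m) c (by omega)
        rw [hexlen] at h1
        rw [h1, explode_colOf g m n hGe c hc, (hrep c hc).1, settleB_eq_padS]
        show padS n (crush0 m (padS n (σ c))) = _
        rw [crush0_padS m n (σ c) (hrep c hc).2.1]
      have hsq1 : Sq2 (fall (explode g m)) n := by
        have := fall_sq (explode g m)
        rwa [hexlen] at this
      obtain ⟨c0, hc0, hrc0⟩ := (isBomb_true_iff g m n hGe).mp hb
      have hrcσ : runCondCol (σ c0) m := by
        rw [(hrep c0 hc0).1] at hrc0
        exact (runCond_padS m n (σ c0) (hrep c0 hc0).2.1).mp hrc0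
      have hsum : sumLen n (fun c => crush0 m (σ c)) < sumLen n σ := by
        unfold sumLen
        exact sum_lt_sum_list (List.range n) _ _
          (fun c _ => crush0_le m (σ c))
          ⟨c0, List.mem_range.mpr hc0, crush0_lt m (σ c0) hrcσ⟩
      have ihh := ih (fall (explode g m)) (fun c => crush0 m (σ c)) (Ge2_of_Sq2 _ _ hsq1)
        (fun c hc => ⟨hcols c hc, crush0_zero_free m (σ c),
          le_trans (crush0_le m (σ c)) (hrep c hc).2.2⟩)
        (by omega)
      refine ⟨fun c hc => ?_, ihh.2⟩
      rw [ihh.1 c hc]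
      show padS n (FixS m (crush0 m (σ c))) = padS n (FixS m (σ c))
      by_cases hrc : runCondCol (σ c) m
      · rw [← FixS_of_bomb m (σ c) (hrep c hc).2.1 hrc]
      · rw [crush0_of_not_zf m (σ c) (hrep c hc).2.1 hrc]
    · rw [Bool.not_eq_true] at hb
      rw [hb]
      rw [if_neg (by simp)]
      refine ⟨fun c hc => ?_, hGe⟩
      have hnrc : ¬ runCondCol (σ c) m := by
        intro hrc
        have : isBombRemaining g m = true := by
          rw [isBomb_true_iff g m n hGe]
          refine ⟨c, hc, ?_⟩
          rw [(hrep c hc).1]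
          exact (runCond_padS m n (σ c) (hrep c hc).2.1).mpr hrc
        rw [hb] at this
        exact Bool.false_ne_true this
      rw [FixS_of_not m (σ c) (hrep c hc).2.1 hnrc]
      exact (hrep c hc).1

theorem whileA_sq (m : Int) (n : Nat) : ∀ (fuel : Nat) (g : List (List Int)), Sq2 g n →
    Sq2 (whileA m fuel g) n := by
  intro fuel
  induction fuel with
  | zero => intro g h; exact h
  | succ fuel ih =>
    intro g hsq
    show Sq2 (if isBombRemaining g m then whileA m fuel (fall (explode g m)) else g) n
    by_cases hb : isBombRemaining g m = true
    · rw [if_pos hb]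
      apply ih
      have := fall_sq (explode g m)
      rwa [(explode_struct g m n (Ge2_of_Sq2 _ _ hsq)).1] at this
    · rw [Bool.not_eq_true] at hb
      rw [hb]
      simpa using hsq

theorem whileA_id (m : Int) (fuel : Nat) (g : List (List Int))
    (hb : isBombRemaining g m = false) : whileA m (fuel+1) g = g := by
  show (if isBombRemaining g m then whileA m fuel (fall (explode g m)) else g) = g
  rw [hb]
  simp

-- ============================================================
-- rounds: sts representation, spill, iterate, cycle detection
-- ============================================================

-- the round step in stack space
def stepS (m : Int) (n : Nat) (ss : List (List Int)) : List (List Int) :=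
  spillB n (ss.map (stabilizeB m))

-- the round step on the board (as port A computes it)
def stepA (m : Int) (g : List (List Int)) : List (List Int) :=
  let g1 := fall (explode g m)
  let g2 := whileA m (nzCount (boardColsOf g1 g1.length) + 1) g1
  fall (rotate g2)

-- sts represent a board
def RepS (n : Nat) (g : List (List Int)) (ss : List (List Int)) : Prop :=
  Ge2 g n ∧ ss.length = n ∧ ∀ c, c < n →
    colOf g n c = padS n (ss.getD c []) ∧ (ss.getD c []).length ≤ n ∧
      ((∀ v ∈ ss.getD c [], v ≠ 0) ∨ (ss.getD c []).length = n)

-- small access helpers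
theorem getD_map_lists (l : List (List Int)) (f : List Int → List Int) (c : Nat)
    (h : c < l.length) : (l.map f).getD c [] = f (l.getD c []) := by
  rw [List.getD_eq_getElem?_getD, List.getElem?_map, List.getElem?_eq_getElem h,
    List.getD_eq_getElem?_getD, List.getElem?_eq_getElem h]
  rfl

theorem map_range_getD (n : Nat) (M : List (List Int)) (G : List Int → Int)
    (h : M.length = n) : (List.range n).map (fun i => G (M.getD i [])) = M.map G := by
  apply List.ext_getElem (by simp [h])
  intro i h1 h2
  simp only [List.getElem_map, List.getElem_range]
  congr 1
  rw [List.getD_eq_getElem?_getD, List.getElem?_eq_getElem (by simp at h2; omega)]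
  rfl

theorem getD_mem (s : List Int) (i : Nat) (h : i < s.length) : s.getD i 0 ∈ s := by
  rw [List.getD_eq_getElem?_getD, List.getElem?_eq_getElem h]
  exact List.getElem_mem h

theorem padS_getD_rev (n j : Nat) (s : List Int) (hj : j < n) (hle : s.length ≤ n) :
    (padS n s).getD (n - 1 - j) 0
      = if j < s.length then s.getD (s.length - 1 - j) 0 else 0 := by
  rw [getD_padS]
  by_cases h : j < s.length
  · rw [if_pos h, if_neg (by omega)]
    congr 1
    omega
  · rw [if_pos (by omega), if_neg h]

theorem filter_map_spill (j : Nat) : ∀ (M : List (List Int)),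
    (∀ s ∈ M, ∀ v ∈ s, v ≠ 0) →
    ((M.map (fun s => if j < s.length then s.getD (s.length - 1 - j) 0 else 0)).filter
        (fun v => v != 0))
      = (M.filter (fun s => decide (j < s.length))).map (fun s => s.getD (s.length - 1 - j) 0) := by
  intro M
  induction M with
  | nil => intro _; rfl
  | cons s M ih =>
    intro hM
    rw [List.map_cons, List.filter_cons, List.filter_cons]
    by_cases h : j < s.length
    · rw [if_pos h]
      have hne : s.getD (s.length - 1 - j) 0 ≠ 0 :=
        hM s List.mem_cons_self _ (getD_mem s _ (by omega))
      rw [if_pos (by simpa using hne), if_pos (by simpa using h), List.map_cons,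
        ih (fun t ht => hM t (List.mem_cons_of_mem _ ht))]
    · rw [if_neg h, if_neg (by simp), if_neg (by simpa using h),
        ih (fun t ht => hM t (List.mem_cons_of_mem _ ht))]

-- one zero-aware explode+fall, column-wise, under the representation
theorem crushed_cols (m : Int) (n : Nat) (g ss : List (List Int)) (hrep : RepS n g ss) :
    (∀ c, c < n → colOf (fall (explode g m)) n c = padS n (crush0 m (ss.getD c [])))
      ∧ Sq2 (fall (explode g m)) n := by
  obtain ⟨hGe, hlen, hcols⟩ := hrep
  have hexlen : (explode g m).length = n := (explode_struct g m n hGe).1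
  have hsq : Sq2 (fall (explode g m)) n := by
    have := fall_sq (explode g m)
    rwa [hexlen] at this
  refine ⟨fun c hc => ?_, hsq⟩
  obtain ⟨hcol, hle, hdisj⟩ := hcols c hc
  have h1 := fall_colOf (explode g m) c (by omega)
  rw [hexlen] at h1
  rw [h1, explode_colOf g m n hGe c hc, hcol, settleB_eq_padS]
  show padS n (crush0 m (padS n (ss.getD c []))) = _
  rcases hdisj with hz | hn
  · rw [crush0_padS m n _ hz]
  · rw [padS_trivial n (ss.getD c []) (by omega)]

theorem crush0_padS_any (m : Int) (n : Nat) (s : List Int)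
    (h : (∀ v ∈ s, v ≠ 0) ∨ s.length = n) : crush0 m (padS n s) = crush0 m s := by
  rcases h with hz | hn
  · exact crush0_padS m n s hz
  · rw [padS_trivial n s (by omega)]

theorem runCond_padS_any (m : Int) (n : Nat) (s : List Int)
    (h : (∀ v ∈ s, v ≠ 0) ∨ s.length = n) :
    runCondCol (padS n s) m ↔ runCondCol s m := by
  rcases h with hz | hn
  · exact runCond_padS m n s hz
  · rw [padS_trivial n s (by omega)]

-- stabilized stacks are zero-free and short
theorem stabilizeB_props (m : Int) (stack : List Int) :
    (∀ v ∈ stabilizeB m stack, v ≠ 0) ∧ (stabilizeB m stack).length ≤ stack.length := by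
  rw [stabilizeB_eq]
  have hp := FixS_props m (crush0 m stack).length (crush0 m stack) (le_refl _)
    (crush0_zero_free m stack)
  exact ⟨hp.1, le_trans hp.2 (crush0_le m stack)⟩

theorem nzCount_eq_sum_filter (g : List (List Int)) (n : Nat) :
    nzCount (boardColsOf g n)
      = ((List.range n).map (fun c => ((colOf g n c).filter (fun v => v != 0)).length)).sum := by
  unfold nzCount
  rw [boardColsOf_eq_map, List.map_map]
  rfl

theorem getD_spillB (n : Nat) (M : List (List Int)) (j : Nat) (hj : j < n) :
    (spillB n M).getD j []
      = (M.filter (fun s => decide (j < s.length))).map (fun s => s.getD (s.length - 1 - j) 0) := by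
  unfold spillB
  rw [List.getD_eq_getElem?_getD, List.getElem?_map, List.getElem?_range hj]
  rfl

theorem step_corr (m : Int) (n : Nat) (g ss : List (List Int)) (hrep : RepS n g ss) :
    RepS n (stepA m g) (stepS m n ss) ∧ Sq2 (stepA m g) n := by
  obtain ⟨hGe, hsslen, hcols⟩ := hrep
  obtain ⟨hc1, hsq1⟩ := crushed_cols m n g ss ⟨hGe, hsslen, hcols⟩
  -- the cascade
  set g1 := fall (explode g m) with hg1
  have hg1len : g1.length = n := hsq1.1
  have hfix := whileA_fix m n (nzCount (boardColsOf g1 g1.length) + 1) g1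
    (fun c => crush0 m (ss.getD c []))
    (Ge2_of_Sq2 _ _ hsq1)
    (fun c hc => ⟨hc1 c hc, crush0_zero_free m _,
      le_trans (crush0_le m _) (hcols c hc).2.1⟩)
    (by
      rw [hg1len, nz_eq_sumLen g1 n (fun c => crush0 m (ss.getD c []))
        (fun c hc => ⟨hc1 c hc, crush0_zero_free m _⟩)]
      omega)
  set g2 := whileA m (nzCount (boardColsOf g1 g1.length) + 1) g1 with hg2
  have hGe2 : Ge2 g2 n := hfix.2
  have hg2len : g2.length = n := hGe2.1
  -- the stabilized stacks
  set M := ss.map (stabilizeB m) with hM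
  have hMlen : M.length = n := by rw [hM, List.length_map, hsslen]
  have hMget : ∀ c, c < n → M.getD c [] = stabilizeB m (ss.getD c []) := by
    intro c hc
    rw [hM, getD_map_lists ss _ c (by omega)]
  have hg2cols : ∀ c, c < n → colOf g2 n c = padS n (M.getD c []) := by
    intro c hc
    rw [hfix.1 c hc, hMget c hc, stabilizeB_eq]
  have hMzf : ∀ t ∈ M, ∀ v ∈ t, v ≠ 0 := by
    intro t ht
    rcases List.mem_map.mp ht with ⟨s0, _, rfl⟩
    exact (stabilizeB_props m s0).1
  have hMle : ∀ c, c < n → (M.getD c []).length ≤ n := by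
    intro c hc
    rw [hMget c hc]
    exact le_trans (stabilizeB_props m _).2 (hcols c hc).2.1
  -- rotate + fall = spill
  have hrotlen : (rotate g2).length = n := by rw [rotate_len]; exact hGe2.1
  have hsqA : Sq2 (fall (rotate g2)) n := by
    have := fall_sq (rotate g2)
    rwa [hrotlen] at this
  have hspill : ∀ j, j < n →
      colOf (fall (rotate g2)) n j = padS n ((spillB n M).getD j []) := by
    intro j hj
    have h1 := fall_colOf (rotate g2) j (by omega)
    rw [hrotlen] at h1
    rw [h1, settleB_eq_padS]
    congr 1
    have hcolrot : colOf (rotate g2) n j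
        = M.map (fun s => if j < s.length then s.getD (s.length - 1 - j) 0 else 0) := by
      rw [← map_range_getD n M _ hMlen]
      unfold colOf
      apply List.map_congr_left
      intro r hr
      have hr' : r < n := List.mem_range.mp hr
      have hcell : get2 (rotate g2) r j = get2 g2 (n - 1 - j) r := by
        have := rotate_cell g2 r j (by omega) (by omega)
        rwa [hg2len] at this
      rw [hcell, ← getD_colOf g2 n r (n-1-j) (by omega), hg2cols r hr',
        padS_getD_rev n j (M.getD r []) hj (hMle r hr')]
    rw [hcolrot, filter_map_spill j M hMzf, getD_spillB n M j hj]
  have hspilllen : ∀ j, j < n → ((spillB n M).getD j []).length ≤ n := by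
    intro j hj
    rw [getD_spillB n M j hj, List.length_map]
    calc (M.filter (fun s => decide (j < s.length))).length
        ≤ M.length := List.length_filter_le _ _
      _ = n := hMlen
  have hspillzf : ∀ j, j < n → ∀ v ∈ (spillB n M).getD j [], v ≠ 0 := by
    intro j hj v hv
    rw [getD_spillB n M j hj] at hv
    rcases List.mem_map.mp hv with ⟨t, htmem, rfl⟩
    have ht := List.of_mem_filter htmem
    have htM := List.mem_of_mem_filter htmem
    have hjlen : j < t.length := by simpa using ht
    exact hMzf t htM _ (getD_mem t _ (by omega))
  have hspilllen2 : (spillB n M).length = n := by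
    unfold spillB
    simp
  refine ⟨⟨Ge2_of_Sq2 _ _ hsqA, ?_, fun c hc => ⟨hspill c hc, hspilllen c hc,
    Or.inl (hspillzf c hc)⟩⟩, hsqA⟩
  show (spillB n M).length = n
  exact hspilllen2

theorem foldl_const_iterate {α : Type} (f : α → α) : ∀ (t : Nat) (a : α),
    (List.range t).foldl (fun x _ => f x) a = f^[t] a := by
  intro t
  induction t with
  | zero => intro a; simp
  | succ t ih =>
    intro a
    rw [List.range_succ, List.foldl_append, ih, List.foldl_cons, List.foldl_nil,
      Function.iterate_succ_apply']

theorem iterate_mod_of_fixed {α : Type} (f : α → α) (p : Nat) (x : α)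
    (hfix : f^[p] x = x) (hp : 1 ≤ p) (q : Nat) : f^[q % p] x = f^[q] x := by
  conv_rhs => rw [show q = q % p + p * (q / p) from (Nat.mod_add_div q p).symm]
  rw [Function.iterate_add_apply, Function.iterate_mul]
  rw [Function.iterate_fixed hfix (q / p)]

theorem loopB_eq (m : Int) (n : Nat) :
    ∀ (r t : Nat) (seen : PySem.Dict (List (List Int)) Nat) (s : List (List Int)),
    (∀ s' j, seen.get? s' = some j → j < t ∧ (stepS m n)^[t - j] s' = s) →
    (stepS m n)^[(loopB m n r t seen s).2] (loopB m n r t seen s).1 = (stepS m n)^[r] s := by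
  intro r
  induction r with
  | zero =>
    intro t seen s _
    simp [loopB]
  | succ r ih =>
    intro t seen s hInv
    cases hget : seen.get? s with
    | some j =>
      have hj := hInv s j hget
      have hp : 1 ≤ t - j := by omega
      show (stepS m n)^[(loopB m n (r+1) t seen s).2] (loopB m n (r+1) t seen s).1 = _
      have hunfold : loopB m n (r+1) t seen s = (s, (r+1) % (t - j)) := by
        show (match seen.get? s with
          | some j => (s, (r+1) % (t - j))
          | none => loopB m n r (t+1) (seen.insert s t) (spillB n (s.map (stabilizeB m)))) = _
        rw [hget]
      rw [hunfold]
      exact iterate_mod_of_fixed (stepS m n) (t - j) s hj.2 hp (r+1)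
    | none =>
      have hunfold : loopB m n (r+1) t seen s
          = loopB m n r (t+1) (seen.insert s t) (spillB n (s.map (stabilizeB m))) := by
        show (match seen.get? s with
          | some j => (s, (r+1) % (t - j))
          | none => loopB m n r (t+1) (seen.insert s t) (spillB n (s.map (stabilizeB m)))) = _
        rw [hget]
      rw [hunfold]
      have hInv' : ∀ s' j, (seen.insert s t).get? s' = some j →
          j < t + 1 ∧ (stepS m n)^[t + 1 - j] s' = spillB n (s.map (stabilizeB m)) := by
        intro s' j hget'
        rw [PySem.Dict.get?_insert] at hget'
        by_cases hss : s' = s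
        · rw [if_pos hss] at hget'
          have hj : j = t := (Option.some.inj hget').symm
          refine ⟨by omega, ?_⟩
          rw [hss, hj, show t + 1 - t = 1 by omega, Function.iterate_one]
          rfl
        · rw [if_neg hss] at hget'
          have h1 := hInv s' j hget'
          refine ⟨by omega, ?_⟩
          rw [show t + 1 - j = (t - j) + 1 by omega, Function.iterate_succ_apply', h1.2]
          rfl
      have := ih (t+1) (seen.insert s t) (spillB n (s.map (stabilizeB m))) hInv'
      rw [this]
      show (stepS m n)^[r] (stepS m n s) = _
      rw [← Function.iterate_succ_apply]

-- ============================================================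
-- final assembly
-- ============================================================

theorem pre_Ge2 (arr : List (List Int)) (hPre : ∀ row ∈ arr, arr.length ≤ row.length) :
    Ge2 arr arr.length := by
  refine ⟨rfl, fun r hr => ?_⟩
  rw [List.getD_eq_getElem?_getD, List.getElem?_eq_getElem hr]
  exact hPre _ (List.getElem_mem hr)

-- the initial stacks (column lists of the raw board)
def stacks0P (arr : List (List Int)) : List (List Int) :=
  (List.range arr.length).map (fun c => arr.map (fun row => row.getD c 0))

-- B's output grid, rebuilt from the stacks
def altBody (n : Nat) (S : List (List Int)) : List (List Int) :=
  (List.range n).map (fun r => (List.range n).map (fun c =>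
    let s := S.getD c []
    if n - s.length ≤ r then s.getD (r - (n - s.length)) 0 else 0))

theorem sol_eq (arr : List (List Int)) (m k : Int) :
    solution arr m k
      = whileA m (nzCount (boardColsOf ((stepA m)^[k.toNat] arr)
            ((stepA m)^[k.toNat] arr).length) + 1) ((stepA m)^[k.toNat] arr) := by
  show whileA m (nzCount (boardColsOf
        ((List.range k.toNat).foldl (fun g _ => stepA m g) (arr.map (fun row => row)))
        ((List.range k.toNat).foldl (fun g _ => stepA m g) (arr.map (fun row => row))).length) + 1)
      ((List.range k.toNat).foldl (fun g _ => stepA m g) (arr.map (fun row => row))) = _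
  rw [map_id_rows, foldl_const_iterate]

theorem alt_eq (arr : List (List Int)) (m k : Int) :
    solution_alt arr m k
      = altBody arr.length
          (if bombedB m ((stepS m arr.length)^[k.toNat] (stacks0P arr))
           then ((stepS m arr.length)^[k.toNat] (stacks0P arr)).map (stabilizeB m)
           else (stepS m arr.length)^[k.toNat] (stacks0P arr)) := by
  have hloop := loopB_eq m arr.length k.toNat 0 PySem.Dict.empty (stacks0P arr)
    (fun s' j h => absurd h (by simp [PySem.Dict.get?_empty]))
  show altBody arr.length
      (if bombedB m ((List.range (loopB m arr.length k.toNat 0 PySem.Dict.empty (stacks0P arr)).2).foldl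
            (fun s _ => stepS m arr.length s)
            (loopB m arr.length k.toNat 0 PySem.Dict.empty (stacks0P arr)).1)
       then ((List.range (loopB m arr.length k.toNat 0 PySem.Dict.empty (stacks0P arr)).2).foldl
            (fun s _ => stepS m arr.length s)
            (loopB m arr.length k.toNat 0 PySem.Dict.empty (stacks0P arr)).1).map (stabilizeB m)
       else (List.range (loopB m arr.length k.toNat 0 PySem.Dict.empty (stacks0P arr)).2).foldl
            (fun s _ => stepS m arr.length s)
            (loopB m arr.length k.toNat 0 PySem.Dict.empty (stacks0P arr)).1) = _
  rw [foldl_const_iterate, hloop]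

theorem getD_mem_lists (L : List (List Int)) (c : Nat) (h : c < L.length) :
    L.getD c [] ∈ L := by
  rw [List.getD_eq_getElem?_getD, List.getElem?_eq_getElem h]
  exact List.getElem_mem h

theorem any_getD (L : List (List Int)) (p : List Int → Bool) :
    L.any p = true ↔ ∃ c, c < L.length ∧ p (L.getD c []) = true := by
  rw [List.any_eq_true]
  constructor
  · rintro ⟨x, hx, hpx⟩
    rcases List.mem_iff_getElem.mp hx with ⟨i, hi, rfl⟩
    refine ⟨i, hi, ?_⟩
    rwa [List.getD_eq_getElem?_getD, List.getElem?_eq_getElem hi]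
  · rintro ⟨c, hc, hpc⟩
    refine ⟨L.getD c [], getD_mem_lists L c hc, hpc⟩

theorem bombedB_iff (m : Int) (n : Nat) (g SS : List (List Int)) (hrep : RepS n g SS) :
    bombedB m SS = isBombRemaining g m := by
  obtain ⟨hGe, hlen, hcols⟩ := hrep
  have h1 : bombedB m SS = true ↔ ∃ c, c < n ∧ runCondCol (colOf g n c) m := by
    unfold bombedB
    rw [any_getD]
    constructor
    · rintro ⟨c, hc, hpc⟩
      rw [hlen] at hc
      refine ⟨c, hc, ?_⟩
      rw [(hcols c hc).1, runCond_padS_any m n _ (hcols c hc).2.2]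
      exact (bombAny_iff m _).mp hpc
    · rintro ⟨c, hc, hrc⟩
      refine ⟨c, by omega, ?_⟩
      rw [(hcols c hc).1, runCond_padS_any m n _ (hcols c hc).2.2] at hrc
      exact (bombAny_iff m _).mpr hrc
  have h2 := isBomb_true_iff g m n hGe
  cases hB : bombedB m SS
  · cases hb : isBombRemaining g m
    · rfl
    · exfalso
      have := h1.mpr (h2.mp hb)
      rw [hB] at this
      exact Bool.false_ne_true this
  · cases hb : isBombRemaining g m
    · exfalso
      have := h2.mpr (h1.mp hB)
      rw [hb] at this
      exact Bool.false_ne_true this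
    · rfl

theorem repS_iter (m : Int) (n : Nat) (g ss : List (List Int)) (h : RepS n g ss) :
    ∀ t : Nat, RepS n ((stepA m)^[t] g) ((stepS m n)^[t] ss)
      ∧ (0 < t → Sq2 ((stepA m)^[t] g) n) := by
  intro t
  induction t with
  | zero => exact ⟨h, fun hh => absurd hh (by omega)⟩
  | succ t ih =>
    rw [Function.iterate_succ_apply', Function.iterate_succ_apply']
    have := step_corr m n _ _ ih.1
    exact ⟨this.1, fun _ => this.2⟩

theorem stacks0_rep (arr : List (List Int)) (hPre : ∀ row ∈ arr, arr.length ≤ row.length) :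
    RepS arr.length arr (stacks0P arr) := by
  refine ⟨pre_Ge2 arr hPre, by unfold stacks0P; simp, fun c hc => ?_⟩
  have hget : (stacks0P arr).getD c [] = arr.map (fun row => row.getD c 0) := by
    unfold stacks0P
    rw [List.getD_eq_getElem?_getD, List.getElem?_map, List.getElem?_range hc]
    rfl
  have hlen : (arr.map (fun row => row.getD c 0)).length = arr.length := by simp
  refine ⟨?_, by rw [hget, hlen], Or.inr (by rw [hget, hlen])⟩
  rw [hget, padS_trivial _ _ (by omega)]
  apply eq_of_getD _ _ arr.length (length_colOf _ _ _) hlen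
  intro r hr
  rw [getD_colOf arr arr.length c r hr]
  rw [List.getD_eq_getElem?_getD, List.getElem?_map, List.getElem?_eq_getElem hr]
  show get2 arr r c = arr[r].getD c 0
  unfold get2
  have : arr.getD r [] = arr[r] := by
    rw [List.getD_eq_getElem?_getD, List.getElem?_eq_getElem hr]
    rfl
  rw [this]

theorem rebuild_eq (n : Nat) (G S : List (List Int)) (hsq : Sq2 G n)
    (hlen : ∀ c, c < n → (S.getD c []).length ≤ n)
    (hcols : ∀ c, c < n → colOf G n c = padS n (S.getD c [])) :
    altBody n S = G := by
  conv_rhs => rw [← reconstruct G n hsq]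
  unfold altBody
  apply List.map_congr_left
  intro r hr
  have hr' : r < n := List.mem_range.mp hr
  apply List.map_congr_left
  intro c hc
  have hc' : c < n := List.mem_range.mp hc
  show (let s := S.getD c []
    if n - s.length ≤ r then s.getD (r - (n - s.length)) 0 else 0) = get2 G r c
  rw [← getD_colOf G n c r hr', hcols c hc', getD_padS]
  by_cases h : n - (S.getD c []).length ≤ r
  · rw [if_pos h, if_neg (by omega)]
  · rw [if_neg h, if_pos (by omega)]

theorem alt_rows_len (arr : List (List Int)) (m k : Int) :
    ∀ row ∈ solution_alt arr m k, row.length = arr.length := by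
  intro row hrow
  rw [alt_eq] at hrow
  unfold altBody at hrow
  rcases List.mem_map.mp hrow with ⟨r, _, rfl⟩
  simp

theorem D_bomb_iff (arr : List (List Int)) (m : Int) :
    (∃ c < arr.length, ∃ j < arr.length, ∃ i < j + 1, get2 arr i c ≠ 0 ∧
        (∀ t < j + 1, i ≤ t → get2 arr t c = get2 arr i c) ∧ m ≤ (j : Int) - (i : Int) + 1)
      ↔ ∃ c, c < arr.length ∧ runCondCol (colOf arr arr.length c) m := by
  constructor
  · rintro ⟨c, hc, j, hj, i, hi, hnz, hrun, hm⟩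
    refine ⟨c, hc, j, by rw [length_colOf]; omega, i, hi, ?_, ?_, hm⟩
    · rwa [getD_colOf arr arr.length c i (by omega)]
    · intro t ht hit
      rw [getD_colOf arr arr.length c t (by omega), getD_colOf arr arr.length c i (by omega)]
      exact hrun t ht hit
  · rintro ⟨c, hc, j, hj, i, hi, hnz, hrun, hm⟩
    rw [length_colOf] at hj
    refine ⟨c, hc, j, hj, i, hi, ?_, ?_, hm⟩
    · rwa [getD_colOf arr arr.length c i (by omega)] at hnz
    · intro t ht hit
      have := hrun t ht hit
      rwa [getD_colOf arr arr.length c t (by omega),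
        getD_colOf arr arr.length c i (by omega)] at this

-- ===== VERDICT (by name: the statement is the Claim_ definition above) =====
theorem solution_spec : Claim_unchanged_solution := by
  unfold Claim_unchanged_solution
  intro arr m k hDom hPre
  unfold Spec_solution
  intro hND
  have hrep0 := stacks0_rep arr hPre
  have hrept := repS_iter m arr.length arr (stacks0P arr) hrep0 k.toNat
  set n := arr.length with hn
  set GA := (stepA m)^[k.toNat] arr with hGA
  set SS := (stepS m n)^[k.toNat] (stacks0P arr) with hSS
  have hrepS : RepS n GA SS := hrept.1
  obtain ⟨hGeA, hSSlen, hSScols⟩ := hrepS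
  have hGAlen : GA.length = n := hGeA.1
  have hbomb_eq : bombedB m SS = isBombRemaining GA m :=
    bombedB_iff m n GA SS ⟨hGeA, hSSlen, hSScols⟩
  rw [sol_eq arr m k, alt_eq arr m k, ← hn, ← hGA, ← hSS, hGAlen]
  by_cases hb : isBombRemaining GA m = true
  · -- a bomb remains: A runs its trailing cascade, B stabilizes every stack
    rw [hbomb_eq, hb, if_pos rfl]
    have hA1 : whileA m (nzCount (boardColsOf GA n) + 1) GA
        = whileA m (nzCount (boardColsOf GA n)) (fall (explode GA m)) := by
      show (if isBombRemaining GA m then _ else _) = _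
      rw [hb]
      simp
    rw [hA1]
    obtain ⟨hcr, hsq1⟩ := crushed_cols m n GA SS ⟨hGeA, hSSlen, hSScols⟩
    have hcrush_col : ∀ c, c < n → crush0 m (SS.getD c []) = crush0 m (colOf GA n c) := by
      intro c hc
      rw [(hSScols c hc).1, crush0_padS_any m n _ (hSScols c hc).2.2]
    obtain ⟨c0, hc0, hrc0⟩ := (isBomb_true_iff GA m n hGeA).mp hb
    have hfuel : sumLen n (fun c => crush0 m (SS.getD c [])) < nzCount (boardColsOf GA n) := by
      rw [nzCount_eq_sum_filter]
      unfold sumLen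
      apply sum_lt_sum_list
      · intro c hcm
        have hc : c < n := List.mem_range.mp hcm
        show (crush0 m (SS.getD c [])).length ≤ _
        rw [hcrush_col c hc]
        exact crush0_le_filter m _
      · refine ⟨c0, List.mem_range.mpr hc0, ?_⟩
        show (crush0 m (SS.getD c0 [])).length < _
        rw [hcrush_col c0 hc0]
        exact crush0_lt_filter m _ hrc0
    have hfix := whileA_fix m n (nzCount (boardColsOf GA n)) (fall (explode GA m))
      (fun c => crush0 m (SS.getD c [])) (Ge2_of_Sq2 _ _ hsq1)
      (fun c hc => ⟨hcr c hc, crush0_zero_free m _,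
        le_trans (crush0_le m _) (hSScols c hc).2.1⟩)
      hfuel
    have hsqAB : Sq2 (whileA m (nzCount (boardColsOf GA n)) (fall (explode GA m))) n :=
      whileA_sq m n _ _ hsq1
    refine (rebuild_eq n _ (SS.map (stabilizeB m)) hsqAB ?_ ?_).symm
    · intro c hc
      rw [getD_map_lists SS _ c (by omega)]
      exact le_trans (stabilizeB_props m _).2 (hSScols c hc).2.1
    · intro c hc
      rw [hfix.1 c hc, getD_map_lists SS _ c (by omega), stabilizeB_eq]
  · -- no bomb remains: A returns the board, B returns the stacks as they stand
    rw [Bool.not_eq_true] at hb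
    rw [hbomb_eq, hb, if_neg (by simp), whileA_id m _ GA hb]
    by_cases hK : 0 < k.toNat
    · have hsqGA : Sq2 GA n := hrept.2 hK
      refine (rebuild_eq n GA SS hsqGA ?_ ?_).symm
      · intro c hc; exact (hSScols c hc).2.1
      · intro c hc; exact (hSScols c hc).1
    · have hK0 : k.toNat = 0 := by omega
      have hGA0 : GA = arr := by rw [hGA, hK0, Function.iterate_zero_apply]
      have hSS0 : SS = stacks0P arr := by rw [hSS, hK0, Function.iterate_zero_apply]
      have hkle : k ≤ 0 := by
        by_contra hk
        push_neg at hk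
        have : 0 < k.toNat := by omega
        omega
      have hnobombD : ¬ ∃ c < arr.length, ∃ j < arr.length, ∃ i < j + 1, get2 arr i c ≠ 0 ∧
          (∀ t < j + 1, i ≤ t → get2 arr t c = get2 arr i c) ∧ m ≤ (j : Int) - (i : Int) + 1 := by
        rw [D_bomb_iff]
        rintro ⟨c, hc, hrc⟩
        have : isBombRemaining arr m = true := by
          rw [isBomb_true_iff arr m arr.length (pre_Ge2 arr hPre)]
          exact ⟨c, hc, hrc⟩
        rw [← hGA0] at this
        rw [hb] at this
        exact Bool.false_ne_true this
      have hragged : ¬ ∃ row ∈ arr, arr.length < row.length := by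
        intro hr
        exact hND ⟨hkle, hr, hnobombD⟩
      have hsqarr : Sq2 arr n := by
        refine ⟨hn.symm, fun r hr => ?_⟩
        have hge := (pre_Ge2 arr hPre).2 r (by omega)
        have hmem : arr.getD r [] ∈ arr := getD_mem_lists arr r (by omega)
        have : ¬ arr.length < (arr.getD r []).length := fun hlong => hragged ⟨_, hmem, hlong⟩
        omega
      rw [hGA0, hSS0]
      refine (rebuild_eq n arr (stacks0P arr) hsqarr ?_ ?_).symm
      · intro c hc
        exact ((stacks0_rep arr hPre).2.2 c hc).2.1
      · intro c hc
        exact ((stacks0_rep arr hPre).2.2 c hc).1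
theorem solution_changed : Claim_changed_solution := by unfold Claim_changed_solution; decide
theorem solution_tight : Claim_exact_solution := by
  unfold Claim_exact_solution
  intro arr m k hDom hPre hD
  obtain ⟨hkle, ⟨row, hrmem, hrlen⟩, hnb⟩ := hD
  have hK0 : k.toNat = 0 := by omega
  have hGe := pre_Ge2 arr hPre
  have hb : isBombRemaining arr m = false := by
    cases hbb : isBombRemaining arr m
    · rfl
    · exfalso
      apply hnb
      rw [D_bomb_iff]
      exact (isBomb_true_iff arr m arr.length hGe).mp hbb
  have hA : solution arr m k = arr := by
    rw [sol_eq arr m k, hK0, Function.iterate_zero_apply]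
    exact whileA_id m _ arr hb
  intro hEq
  rw [hA] at hEq
  have := alt_rows_len arr m k row (hEq ▸ hrmem)
  omega
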